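-- pv_equiv track=rewrite | github.com/GitMonsters/octotetrahedral-agi | arc-puzzle-catalog/solves/14870c6d/solver.py | transform
-- ===== SOURCE A (Python) =====
-- def transform(grid):
--     from collections import Counter
--
--     rows, cols = len(grid), len(grid[0])
--     out = [row[:] for row in grid]
--
--     flat = [grid[r][c] for r in range(rows) for c in range(cols)]
--     ctr = Counter(flat)
--     bg = ctr.most_common(1)[0][0]
--     rect_colors = [c for c in ctr if c != bg]
--     if not rect_colors:
--         return out
--     rect_color = rect_colors[0]
--
--     # Find connected rectangles
--     visited = [[False] * cols for _ in range(rows)]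
--     rects = []
--     for r in range(rows):
--         for c in range(cols):
--             if grid[r][c] == rect_color and not visited[r][c]:
--                 min_r, max_r, min_c, max_c = r, r, c, c
--                 stack = [(r, c)]
--                 visited[r][c] = True
--                 while stack:
--                     cr, cc = stack.pop()
--                     min_r, max_r = min(min_r, cr), max(max_r, cr)
--                     min_c, max_c = min(min_c, cc), max(max_c, cc)
--                     for dr, dc in [(0, 1), (0, -1), (1, 0), (-1, 0)]:
--                         nr, nc = cr + dr, cc + dc
--                         if 0 <= nr < rows and 0 <= nc < cols and not visited[nr][nc] and grid[nr][nc] == rect_color: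
--                             visited[nr][nc] = True
--                             stack.append((nr, nc))
--                 rects.append((min_r, min_c, max_r, max_c))
--
--     # Build masks: border width = max(height, width) // 2
--     border_mask = [[False] * cols for _ in range(rows)]
--     rect_mask = [[False] * cols for _ in range(rows)]
--
--     for (r1, c1, r2, c2) in rects:
--         B = max(r2 - r1 + 1, c2 - c1 + 1) // 2
--         for r in range(r1, r2 + 1):
--             for c in range(c1, c2 + 1):
--                 rect_mask[r][c] = True
--         for r in range(max(0, r1 - B), min(rows, r2 + B + 1)):
--             for c in range(max(0, c1 - B), min(cols, c2 + B + 1)):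
--                 if not (r1 <= r <= r2 and c1 <= c <= c2):
--                     border_mask[r][c] = True
--
--     # For each row: find leftmost border of rects with body on this row
--     for r in range(rows):
--         body_rects = [(r1, c1, r2, c2) for (r1, c1, r2, c2) in rects if r1 <= r <= r2]
--         L = cols
--         if body_rects:
--             for (r1, c1, r2, c2) in body_rects:
--                 B = max(r2 - r1 + 1, c2 - c1 + 1) // 2
--                 L = min(L, max(0, c1 - B))
--
--         for c in range(cols):
--             if rect_mask[r][c]:
--                 pass  # rect body keeps its color
--             elif border_mask[r][c]:
--                 out[r][c] = 2
--             elif body_rects and c >= L: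
--                 out[r][c] = 5  # shadow
--
--     return out
-- ===== SOURCE B (Python) =====
-- def transform(grid):
--     rows, cols = len(grid), len(grid[0])
--
--     # one-pass tally in first-seen order, instead of Counter
--     order = []
--     counts = {}
--     for row in grid:
--         for v in row:
--             if v in counts:
--                 counts[v] += 1
--             else:
--                 counts[v] = 1
--                 order.append(v)
--     bg = max(order, key=lambda v: counts[v])
--     rect_colors = [v for v in order if v != bg]
--     if not rect_colors:
--         return [row[:] for row in grid]
--     rect_color = rect_colors[0]
--
--     # component growth by iterated set dilation to a fixpoint (no stack, no
--     # per-cell visited marking during the growth): the region is repeatedly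
--     # dilated by its 4-neighbours of the target colour until it stops growing.
--     def grow(seed):
--         comp = {seed}
--         while True:
--             grown = set(comp)
--             for (r, c) in comp:
--                 for nr, nc in ((r, c + 1), (r, c - 1), (r + 1, c), (r - 1, c)):
--                     if 0 <= nr < rows and 0 <= nc < cols and grid[nr][nc] == rect_color:
--                         grown.add((nr, nc))
--             if len(grown) == len(comp):
--                 return comp
--             comp = grown
--
--     visited = set()
--     rects = []
--     for r in range(rows):
--         for c in range(cols):
--             if grid[r][c] == rect_color and (r, c) not in visited:
--                 comp = grow((r, c))
--                 visited |= comp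
--                 rs = [p[0] for p in comp]
--                 cs = [p[1] for p in comp]
--                 rects.append((min(rs), min(cs), max(rs), max(cs)))
--
--     # masks as coordinate sets instead of boolean matrices
--     rect_cells = set()
--     border_cells = set()
--     for (r1, c1, r2, c2) in rects:
--         B = max(r2 - r1 + 1, c2 - c1 + 1) // 2
--         for r in range(r1, r2 + 1):
--             for c in range(c1, c2 + 1):
--                 rect_cells.add((r, c))
--         for r in range(max(0, r1 - B), min(rows, r2 + B + 1)):
--             for c in range(max(0, c1 - B), min(cols, c2 + B + 1)):
--                 if not (r1 <= r <= r2 and c1 <= c <= c2):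
--                     border_cells.add((r, c))
--
--     # rebuild each row instead of mutating a copy of grid
--     out = []
--     for r in range(rows):
--         Ls = [max(0, c1 - max(r2 - r1 + 1, c2 - c1 + 1) // 2)
--               for (r1, c1, r2, c2) in rects if r1 <= r <= r2]
--         L = min(Ls, default=cols)
--         row_out = []
--         for c in range(cols):
--             if (r, c) in rect_cells:
--                 row_out.append(grid[r][c])
--             elif (r, c) in border_cells:
--                 row_out.append(2)
--             elif Ls and c >= L:
--                 row_out.append(5)
--             else:
--                 row_out.append(grid[r][c])
--         out.append(row_out)
--     return out
-- ===== Notes on version B (the rewrite author's own statement) =====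
-- stated objective: alternative
-- what changed: B finds each connected component by iterated set dilation to a fixpoint (morphological region growing) instead of a stack-based DFS flood fill, computes each bounding box from the finished component's cell set via min/max rather than folding it along the traversal, tallies colors in one pass instead of Counter, keeps the two masks as coordinate sets instead of boolean matrices, and rebuilds the output rows instead of mutating a copy of the grid.
-- outside the precondition, e.g. on transform([[1], [2, 3]]): A returns [[1], [2, 3]], B returns [[1], [2]]
import Mathlib
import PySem

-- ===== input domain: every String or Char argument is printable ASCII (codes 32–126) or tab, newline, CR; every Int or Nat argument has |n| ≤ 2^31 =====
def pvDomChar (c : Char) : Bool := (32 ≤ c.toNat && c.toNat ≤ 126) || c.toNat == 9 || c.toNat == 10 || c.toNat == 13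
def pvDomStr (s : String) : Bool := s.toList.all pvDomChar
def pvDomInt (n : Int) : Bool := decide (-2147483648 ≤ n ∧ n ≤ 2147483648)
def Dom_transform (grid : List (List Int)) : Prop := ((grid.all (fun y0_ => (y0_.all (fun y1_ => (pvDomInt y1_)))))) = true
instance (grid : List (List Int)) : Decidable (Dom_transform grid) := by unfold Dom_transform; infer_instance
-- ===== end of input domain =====

-- B finds connected components by iterated set dilation to a fixpoint instead of a
-- stack-based DFS flood fill, computes bounding boxes from the finished component sets,
-- tallies colors in one pass, keeps masks as coordinate sets, and rebuilds output rows
-- (objective: alternative, not faster).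

-- ===== shared tiny indexing helper (both Pythons index grid the same way) =====
def pvCellI (grid : List (List Int)) (r c : Int) : Int :=
  PySem.List.pyGetD (PySem.List.pyGetD grid r []) c 0

-- ===== PORT A =====
def pvReadB (m : List (List Bool)) (r c : Int) (d : Bool) : Bool :=
  PySem.List.pyGetD (PySem.List.pyGetD m r []) c d

-- writes only ever happen at nonnegative coordinates in A; the guard makes that explicit
def pvWriteB (m : List (List Bool)) (r c : Int) : List (List Bool) :=
  if 0 ≤ r ∧ 0 ≤ c then m.set r.toNat ((m.getD r.toNat []).set c.toNat true) else m

def pvCF (m : List (List Bool)) : Nat := (m.map (fun row => row.count false)).sum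

def pvPushA (grid : List (List Int)) (rc rows cols cr cc : Int)
    (s : List (List Bool) × List (Int × Int)) (d : Int × Int) :
    List (List Bool) × List (Int × Int) :=
  if 0 ≤ cr + d.1 ∧ cr + d.1 < rows ∧ 0 ≤ cc + d.2 ∧ cc + d.2 < cols ∧
      pvReadB s.1 (cr + d.1) (cc + d.2) true = false ∧ pvCellI grid (cr + d.1) (cc + d.2) = rc
  then (pvWriteB s.1 (cr + d.1) (cc + d.2), (cr + d.1, cc + d.2) :: s.2)
  else s

-- termination facts for the loops (cited in decreasing_by)

-- generic: a fold whose every step either decreases a measure or is the identity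
theorem pvFoldlDec {α β : Type} (meas : α → Nat) (f : α → β → α)
    (hstep : ∀ s d, meas (f s d) < meas s ∨ f s d = s) (l : List β) (s : α) :
    meas (l.foldl f s) < meas s ∨ l.foldl f s = s := by
  induction l generalizing s with
  | nil => right; rfl
  | cons x xs ih =>
    rw [List.foldl_cons]
    rcases hstep s x with h | h
    · left
      rcases ih (f s x) with h2 | h2
      · exact h2.trans h
      · rw [h2]; exact h
    · rw [h]; exact ih s

theorem pvCountPLt {α : Type} (l : List α) (p q : α → Bool) (x : α) (hx : x ∈ l)
    (hpx : p x = true) (hqx : q x = false) (himp : ∀ a, q a = true → p a = true) :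
    l.countP q < l.countP p := by
  obtain ⟨l1, l2, rfl⟩ := List.append_of_mem hx
  have h1 : l1.countP q ≤ l1.countP p := List.countP_mono_left (fun a _ => himp a)
  have h2 : l2.countP q ≤ l2.countP p := List.countP_mono_left (fun a _ => himp a)
  simp [List.countP_append, hpx, hqx]
  omega

theorem count_false_set_lt (row : List Bool) (j : Nat) (hj : j < row.length) (h : row[j] = false) :
    (row.set j true).count false < row.count false := by
  have h1 : row.set j true = row.take j ++ true :: row.drop (j+1) :=
    List.set_eq_take_cons_drop true hj
  conv_rhs => rw [show row = row.take j ++ row[j] :: row.drop (j+1) by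
    rw [List.getElem_cons_drop, List.take_append_drop]]
  rw [h1, h]
  simp [List.count_append]

theorem pvReadB_false (m : List (List Bool)) (r c : Int) (h0 : 0 ≤ r) (h1 : 0 ≤ c)
    (h : pvReadB m r c true = false) :
    ∃ (hr : r.toNat < m.length) (hc : c.toNat < m[r.toNat].length), m[r.toNat][c.toNat] = false := by
  unfold pvReadB at h
  simp only [PySem.List.pyGetD, PySem.List.pyGet?, PySem.List.pyIdx?, h0, h1, if_pos] at h
  have hr : r.toNat < m.length := by
    by_contra hr
    rw [if_neg (show ¬ r < (m.length : Int) by omega)] at h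
    simp at h
  rw [if_pos (show r < (m.length : Int) by omega)] at h
  simp only [List.getElem?_eq_getElem hr, Option.bind, Option.getD] at h
  have hc : c.toNat < m[r.toNat].length := by
    by_contra hc
    rw [if_neg (show ¬ c < (m[r.toNat].length : Int) by omega)] at h
    simp at h
  rw [if_pos (show c < (m[r.toNat].length : Int) by omega)] at h
  simp only [List.getElem?_eq_getElem hc] at h
  exact ⟨hr, hc, h⟩

theorem pvCF_write_lt (m : List (List Bool)) (r c : Int) (h0 : 0 ≤ r) (h1 : 0 ≤ c)
    (h : pvReadB m r c true = false) : pvCF (pvWriteB m r c) < pvCF m := by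
  obtain ⟨hr, hc, hfalse⟩ := pvReadB_false m r c h0 h1 h
  unfold pvWriteB
  rw [if_pos ⟨h0, h1⟩, List.getD_eq_getElem m [] hr]
  rw [List.set_eq_take_cons_drop _ hr]
  conv_rhs => rw [show m = m.take r.toNat ++ m[r.toNat] :: m.drop (r.toNat+1) by
    rw [List.getElem_cons_drop, List.take_append_drop]]
  unfold pvCF
  simp only [List.map_append, List.map_cons, List.sum_append, List.sum_cons]
  have := count_false_set_lt m[r.toNat] c.toNat hc hfalse
  omega

theorem pvPushA_dec (grid : List (List Int)) (rc rows cols cr cc : Int)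
    (s : List (List Bool) × List (Int × Int)) (d : Int × Int) :
    pvCF (pvPushA grid rc rows cols cr cc s d).1 < pvCF s.1 ∨ pvPushA grid rc rows cols cr cc s d = s := by
  unfold pvPushA
  split
  · rename_i h
    left
    exact pvCF_write_lt s.1 (cr + d.1) (cc + d.2) h.1 h.2.2.1 h.2.2.2.2.1
  · right; rfl

theorem pvPushA_fold_dec (grid : List (List Int)) (rc rows cols cr cc : Int)
    (l : List (Int × Int)) (s : List (List Bool) × List (Int × Int)) :
    pvCF (l.foldl (pvPushA grid rc rows cols cr cc) s).1 < pvCF s.1 ∨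
      l.foldl (pvPushA grid rc rows cols cr cc) s = s :=
  pvFoldlDec (fun s => pvCF s.1) _ (pvPushA_dec grid rc rows cols cr cc) l s

def pvFloodA (grid : List (List Int)) (rc rows cols : Int) (vis : List (List Bool))
    (stack : List (Int × Int)) (mr xr mc xc : Int) :
    List (List Bool) × Int × Int × Int × Int :=
  match stack with
  | [] => (vis, mr, xr, mc, xc)
  | (cr, cc) :: rest =>
    let s := [((0:Int), (1:Int)), (0, -1), (1, 0), (-1, 0)].foldl (pvPushA grid rc rows cols cr cc) (vis, rest)
    pvFloodA grid rc rows cols s.1 s.2 (min mr cr) (max xr cr) (min mc cc) (max xc cc)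
termination_by (pvCF vis, stack.length)
decreasing_by
  rcases pvPushA_fold_dec grid rc rows cols cr cc [((0:Int), (1:Int)), (0, -1), (1, 0), (-1, 0)] (vis, rest) with h | h
  · exact Prod.Lex.left _ _ h
  · rw [h]; exact Prod.Lex.right _ (by simp)

def pvScanA (grid : List (List Int)) (rc rows cols : Int) :
    List (List Bool) × List (Int × Int × Int × Int) :=
  (PySem.List.pyRange 0 rows).foldl (fun st r =>
    (PySem.List.pyRange 0 cols).foldl (fun st c =>
      if pvCellI grid r c = rc ∧ pvReadB st.1 r c true = false then
        let res := pvFloodA grid rc rows cols (pvWriteB st.1 r c) [(r, c)] r r c c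
        (res.1, st.2 ++ [(res.2.1, res.2.2.2.1, res.2.2.1, res.2.2.2.2)])
      else st) st)
    (List.replicate rows.toNat (List.replicate cols.toNat false), [])

def pvMasksA (rows cols : Int) (rects : List (Int × Int × Int × Int)) :
    List (List Bool) × List (List Bool) :=
  rects.foldl (fun ms q =>
    let r1 := q.1
    let c1 := q.2.1
    let r2 := q.2.2.1
    let c2 := q.2.2.2
    let B := PySem.Int.floordiv (max (r2 - r1 + 1) (c2 - c1 + 1)) 2
    let rm := (PySem.List.pyRange r1 (r2 + 1)).foldl (fun m r =>
      (PySem.List.pyRange c1 (c2 + 1)).foldl (fun m c => pvWriteB m r c) m) ms.1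
    let bm := (PySem.List.pyRange (max 0 (r1 - B)) (min rows (r2 + B + 1))).foldl (fun m r =>
      (PySem.List.pyRange (max 0 (c1 - B)) (min cols (c2 + B + 1))).foldl (fun m c =>
        if ¬(r1 ≤ r ∧ r ≤ r2 ∧ c1 ≤ c ∧ c ≤ c2) then pvWriteB m r c else m) m) ms.2
    (rm, bm))
    (List.replicate rows.toNat (List.replicate cols.toNat false),
     List.replicate rows.toNat (List.replicate cols.toNat false))

def pvWriteI (m : List (List Int)) (r c v : Int) : List (List Int) :=
  if 0 ≤ r ∧ 0 ≤ c then m.set r.toNat ((m.getD r.toNat []).set c.toNat v) else m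

def pvShadowL (q : Int × Int × Int × Int) : Int :=
  max 0 (q.2.1 - PySem.Int.floordiv (max (q.2.2.1 - q.1 + 1) (q.2.2.2 - q.2.1 + 1)) 2)

def pvRowPhaseA (rows cols : Int) (rects : List (Int × Int × Int × Int))
    (rm bm : List (List Bool)) (out : List (List Int)) : List (List Int) :=
  (PySem.List.pyRange 0 rows).foldl (fun out r =>
    let bodyRects := rects.filter (fun q => decide (q.1 ≤ r ∧ r ≤ q.2.2.1))
    let L := bodyRects.foldl (fun L q => min L (pvShadowL q)) cols
    (PySem.List.pyRange 0 cols).foldl (fun out c =>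
      if pvReadB rm r c false = true then out
      else if pvReadB bm r c false = true then pvWriteI out r c 2
      else if bodyRects ≠ [] ∧ L ≤ c then pvWriteI out r c 5
      else out) out) out

def transform (grid : List (List Int)) : List (List Int) :=
  let rows : Int := grid.length
  let cols : Int := (PySem.List.pyGetD grid 0 []).length
  let out := grid.map (fun row => PySem.List.slice row none none)
  let flat := (PySem.List.pyRange 0 rows).flatMap (fun r =>
    (PySem.List.pyRange 0 cols).map (fun c => pvCellI grid r c))
  let ctr := PySem.Dict.counter flat
  let bg := (PySem.List.maxD ctr.items (fun kv => kv.2) (0, 0)).1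
  let rectColors := ctr.keys.filter (fun k => k != bg)
  if rectColors = [] then out
  else
    let rc := rectColors.headD 0
    let rects := (pvScanA grid rc rows cols).2
    let masks := pvMasksA rows cols rects
    pvRowPhaseA rows cols rects masks.1 masks.2 out

-- ===== PORT B =====
-- the four 4-neighbours of a cell, as Source B writes them
def pvNbrs (p : Int × Int) : List (Int × Int) :=
  [(p.1, p.2 + 1), (p.1, p.2 - 1), (p.1 + 1, p.2), (p.1 - 1, p.2)]

-- one dilation pass: add every in-bounds rect_color 4-neighbour of every cell of comp
def pvDilStep (grid : List (List Int)) (rc rows cols : Int)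
    (s : PySem.Set (Int × Int)) (p : Int × Int) : PySem.Set (Int × Int) :=
  (pvNbrs p).foldl (fun s q =>
    if 0 ≤ q.1 ∧ q.1 < rows ∧ 0 ≤ q.2 ∧ q.2 < cols ∧ pvCellI grid q.1 q.2 = rc then
      PySem.Set.add s q
    else s) s

def pvDilate (grid : List (List Int)) (rc rows cols : Int)
    (comp : PySem.Set (Int × Int)) : PySem.Set (Int × Int) :=
  comp.foldl (pvDilStep grid rc rows cols) comp

-- termination facts for the fixpoint loop (cited in decreasing_by)
def pvCand (rows cols : Int) : List (Int × Int) :=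
  (PySem.List.pyRange 0 rows).flatMap (fun r => (PySem.List.pyRange 0 cols).map (fun c => (r, c)))

def pvMu (rows cols : Int) (vis : PySem.Set (Int × Int)) : Nat :=
  (pvCand rows cols).countP (fun p => !vis.contains p)

theorem pvMem_pvCand (rows cols : Int) (p : Int × Int)
    (h : 0 ≤ p.1 ∧ p.1 < rows ∧ 0 ≤ p.2 ∧ p.2 < cols) : p ∈ pvCand rows cols := by
  unfold pvCand
  simp only [List.mem_flatMap, List.mem_map, PySem.List.mem_pyRange_one]
  exact ⟨p.1, ⟨h.1, h.2.1⟩, p.2, ⟨h.2.2.1, h.2.2.2⟩, rfl⟩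

theorem pvMu_add_dec (rows cols : Int) (s : PySem.Set (Int × Int)) (q : Int × Int)
    (hq : 0 ≤ q.1 ∧ q.1 < rows ∧ 0 ≤ q.2 ∧ q.2 < cols) :
    pvMu rows cols (PySem.Set.add s q) < pvMu rows cols s ∨ PySem.Set.add s q = s := by
  unfold PySem.Set.add
  split
  · right; rfl
  · left
    rename_i h
    unfold pvMu
    refine pvCountPLt _ _ _ q (pvMem_pvCand rows cols q hq) ?_ ?_ ?_
    · simpa using h
    · simp
    · intro a ha
      simp only [Bool.not_eq_eq_eq_not, Bool.not_true] at ha ⊢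
      simp at ha ⊢
      tauto

theorem pvDilStep_dec (grid : List (List Int)) (rc rows cols : Int)
    (s : PySem.Set (Int × Int)) (p : Int × Int) :
    pvMu rows cols (pvDilStep grid rc rows cols s p) < pvMu rows cols s ∨
      pvDilStep grid rc rows cols s p = s := by
  unfold pvDilStep
  refine pvFoldlDec (pvMu rows cols) _ ?_ (pvNbrs p) s
  intro s q
  split
  · rename_i h
    exact pvMu_add_dec rows cols s q ⟨h.1, h.2.1, h.2.2.1, h.2.2.2.1⟩
  · right; rfl

theorem pvDilate_dec (grid : List (List Int)) (rc rows cols : Int)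
    (comp : PySem.Set (Int × Int)) :
    pvMu rows cols (pvDilate grid rc rows cols comp) < pvMu rows cols comp ∨
      pvDilate grid rc rows cols comp = comp :=
  pvFoldlDec (pvMu rows cols) _ (pvDilStep_dec grid rc rows cols) comp comp

-- the fixpoint loop of Source B's grow()
def pvGrow (grid : List (List Int)) (rc rows cols : Int)
    (comp : PySem.Set (Int × Int)) : PySem.Set (Int × Int) :=
  let g := pvDilate grid rc rows cols comp
  if g.length = comp.length then comp else pvGrow grid rc rows cols g
termination_by pvMu rows cols comp
decreasing_by
  rename_i hne
  rcases pvDilate_dec grid rc rows cols comp with h | h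
  · exact h
  · exact absurd (by show List.length (pvDilate grid rc rows cols comp) = _; rw [h]) hne

def pvScanB (grid : List (List Int)) (rc rows cols : Int) :
    PySem.Set (Int × Int) × List (Int × Int × Int × Int) :=
  (PySem.List.pyRange 0 rows).foldl (fun st r =>
    (PySem.List.pyRange 0 cols).foldl (fun st c =>
      if pvCellI grid r c = rc ∧ ¬st.1.contains (r, c) = true then
        let comp := pvGrow grid rc rows cols (PySem.Set.add PySem.Set.empty (r, c))
        let rs := comp.map Prod.fst
        let cs := comp.map Prod.snd
        (PySem.Set.union st.1 comp,
         st.2 ++ [(PySem.List.minD rs (fun x => x) 0, PySem.List.minD cs (fun x => x) 0,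
                   PySem.List.maxD rs (fun x => x) 0, PySem.List.maxD cs (fun x => x) 0)])
      else st) st)
    (PySem.Set.empty, [])

def pvCellsB (rows cols : Int) (rects : List (Int × Int × Int × Int)) :
    PySem.Set (Int × Int) × PySem.Set (Int × Int) :=
  rects.foldl (fun cs q =>
    let r1 := q.1
    let c1 := q.2.1
    let r2 := q.2.2.1
    let c2 := q.2.2.2
    let B := PySem.Int.floordiv (max (r2 - r1 + 1) (c2 - c1 + 1)) 2
    let rcs := (PySem.List.pyRange r1 (r2 + 1)).foldl (fun s r =>
      (PySem.List.pyRange c1 (c2 + 1)).foldl (fun s c => PySem.Set.add s (r, c)) s) cs.1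
    let bcs := (PySem.List.pyRange (max 0 (r1 - B)) (min rows (r2 + B + 1))).foldl (fun s r =>
      (PySem.List.pyRange (max 0 (c1 - B)) (min cols (c2 + B + 1))).foldl (fun s c =>
        if ¬(r1 ≤ r ∧ r ≤ r2 ∧ c1 ≤ c ∧ c ≤ c2) then PySem.Set.add s (r, c) else s) s) cs.2
    (rcs, bcs))
    (PySem.Set.empty, PySem.Set.empty)

def pvRowPhaseB (grid : List (List Int)) (rows cols : Int)
    (rects : List (Int × Int × Int × Int)) (rcs bcs : PySem.Set (Int × Int)) : List (List Int) :=
  (PySem.List.pyRange 0 rows).foldl (fun out r =>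
    let Ls := (rects.filter (fun q => decide (q.1 ≤ r ∧ r ≤ q.2.2.1))).map pvShadowL
    let L := PySem.List.minD Ls (fun x => x) cols
    out ++ [(PySem.List.pyRange 0 cols).foldl (fun row c =>
      row ++ [if rcs.contains (r, c) = true then pvCellI grid r c
              else if bcs.contains (r, c) = true then 2
              else if Ls ≠ [] ∧ L ≤ c then 5
              else pvCellI grid r c]) []]) []

def transform_alt (grid : List (List Int)) : List (List Int) :=
  let rows : Int := grid.length
  let cols : Int := (PySem.List.pyGetD grid 0 []).length
  let tally := grid.foldl (fun (s : List Int × PySem.Dict Int Int) row =>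
    row.foldl (fun s v =>
      if s.2.contains v then (s.1, s.2.insert v (s.2.getD v 0 + 1))
      else (s.1 ++ [v], s.2.insert v 1)) s) ([], PySem.Dict.empty)
  let bg := PySem.List.maxD tally.1 (fun v => tally.2.getD v 0) 0
  let rectColors := tally.1.filter (fun v => v != bg)
  if rectColors = [] then grid.map (fun row => PySem.List.slice row none none)
  else
    let rc := rectColors.headD 0
    let rects := (pvScanB grid rc rows cols).2
    let cells := pvCellsB rows cols rects
    pvRowPhaseB grid rows cols rects cells.1 cells.2

-- ===== PRECONDITION & SPEC =====
-- Pre_ restricts to nonempty rectangular grids (the natural ARC domain): A raises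
-- IndexError on an empty grid / empty first row / a row shorter than grid[0], and on a
-- ragged grid with over-long rows A's copied rows keep cells beyond grid[0]'s width
-- while B rebuilds every row at exactly that width.
def Pre_transform (grid : List (List Int)) : Prop :=
  grid ≠ [] ∧ grid.headD [] ≠ [] ∧ ∀ row ∈ grid, row.length = (grid.headD []).length

instance (grid : List (List Int)) : Decidable (Pre_transform grid) := by
  unfold Pre_transform; infer_instance

def pvWitness_transform : List (List Int) := [[0, 1], [0, 0]]

def Spec_transform (grid : List (List Int)) (out : List (List Int)) : Prop := out = transform_alt grid
instance (grid : List (List Int)) (out : List (List Int)) : Decidable (Spec_transform grid out) := by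
  unfold Spec_transform; infer_instance

-- ===== CLAIM (what is proved, stated in full; the proofs are below) =====
def Claim_equal_transform : Prop :=
  ∀ (grid : List (List Int)), Dom_transform grid → Pre_transform grid → Spec_transform grid (transform grid)

-- ===== LEMMAS AND PROOFS =====

-- ===== generic matrix read/write lemmas (shared) =====

theorem pvReadB_q (m : List (List Bool)) (r c : Int) (d : Bool) (h0 : 0 ≤ r) (h1 : 0 ≤ c) :
    pvReadB m r c d = ((m[r.toNat]?.getD [])[c.toNat]?).getD d := by
  unfold pvReadB
  simp only [PySem.List.pyGetD, PySem.List.pyGet?, PySem.List.pyIdx?, h0, h1, if_pos]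
  by_cases hr : r.toNat < m.length
  · rw [if_pos (show r < (m.length : Int) by omega)]
    simp only [Option.bind, List.getElem?_eq_getElem hr, Option.getD]
    by_cases hc : c.toNat < m[r.toNat].length
    · rw [if_pos (show c < (m[r.toNat].length : Int) by omega)]
    · rw [if_neg (show ¬ c < (m[r.toNat].length : Int) by omega),
        List.getElem?_eq_none (show m[r.toNat].length ≤ c.toNat by omega)]
  · rw [if_neg (show ¬ r < (m.length : Int) by omega),
      List.getElem?_eq_none (show m.length ≤ r.toNat by omega)]
    show ((if c < ((([] : List Bool).length : Nat) : Int) then some c.toNat else none).bind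
      fun a => ([] : List Bool)[a]?).getD d = _
    rw [if_neg (show ¬ c < ((([] : List Bool).length : Nat) : Int) by simp; omega)]
    rfl

theorem pvReadB_eq_getElem (m : List (List Bool)) (r c : Int) (d : Bool) (h0 : 0 ≤ r) (h1 : 0 ≤ c)
    (hr : r.toNat < m.length) (hc : c.toNat < m[r.toNat].length) :
    pvReadB m r c d = m[r.toNat][c.toNat] := by
  rw [pvReadB_q m r c d h0 h1, List.getElem?_eq_getElem hr]
  simp [List.getElem?_eq_getElem hc]

theorem pvWriteB_length (m : List (List Bool)) (r c : Int) :
    (pvWriteB m r c).length = m.length := by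
  unfold pvWriteB; split <;> simp

theorem pvWriteB_rows (m : List (List Bool)) (r c : Int) (n : Nat)
    (h : ∀ row ∈ m, row.length = n) : ∀ row ∈ pvWriteB m r c, row.length = n := by
  unfold pvWriteB
  split
  · by_cases hr : r.toNat < m.length
    · intro row hrow
      rcases List.mem_or_eq_of_mem_set hrow with h' | h'
      · exact h row h'
      · subst h'
        rw [List.length_set, List.getD_eq_getElem m [] hr]
        exact h _ (List.getElem_mem hr)
    · rw [List.set_eq_of_length_le (by omega)]
      exact h
  · exact h

theorem pvReadB_write_self (m : List (List Bool)) (r c : Int) (d : Bool)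
    (h0 : 0 ≤ r) (h1 : 0 ≤ c) (hr : r.toNat < m.length) (hc : c.toNat < m[r.toNat].length) :
    pvReadB (pvWriteB m r c) r c d = true := by
  unfold pvWriteB
  rw [if_pos ⟨h0, h1⟩, List.getD_eq_getElem m [] hr]
  rw [pvReadB_q _ _ _ _ h0 h1]
  rw [List.getElem?_set_self (by simpa using hr)]
  simp only [Option.getD_some]
  rw [List.getElem?_set_self (by simpa using hc)]
  rfl

theorem pvReadB_write_ne (m : List (List Bool)) (r c r' c' : Int) (d : Bool)
    (h0 : 0 ≤ r) (h1 : 0 ≤ c) (h0' : 0 ≤ r') (h1' : 0 ≤ c')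
    (hne : ¬(r' = r ∧ c' = c)) :
    pvReadB (pvWriteB m r c) r' c' d = pvReadB m r' c' d := by
  unfold pvWriteB
  rw [if_pos ⟨h0, h1⟩]
  rw [pvReadB_q _ _ _ _ h0' h1', pvReadB_q _ _ _ _ h0' h1']
  by_cases hrr : r'.toNat = r.toNat
  · have hcc : c'.toNat ≠ c.toNat := by omega
    rw [hrr]
    by_cases hr : r.toNat < m.length
    · rw [List.getElem?_set_self (by simpa using hr)]
      rw [List.getElem?_eq_getElem hr]
      simp only [Option.getD_some]
      rw [List.getElem?_set_ne (by omega)]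
      rw [List.getD_eq_getElem m [] hr]
    · rw [List.set_eq_of_length_le (by omega)]
  · rw [List.getElem?_set_ne (by omega)]

theorem pvContains_add {α : Type} [BEq α] [LawfulBEq α] (s : PySem.Set α) (x y : α) :
    (PySem.Set.add s x).contains y = (s.contains y || y == x) := by
  unfold PySem.Set.add
  split
  · rename_i h
    by_cases hyx : y = x
    · subst hyx; simp_all
    · simp [hyx]
  · by_cases hyx : y = x <;> simp [hyx]

-- ===== graph-theoretic view of the grid (proof-side only) =====

def pvOkc (grid : List (List Int)) (rc rows cols : Int) (p : Int × Int) : Prop :=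
  0 ≤ p.1 ∧ p.1 < rows ∧ 0 ≤ p.2 ∧ p.2 < cols ∧ pvCellI grid p.1 p.2 = rc

def pvAdjc (grid : List (List Int)) (rc rows cols : Int) (p q : Int × Int) : Prop :=
  pvOkc grid rc rows cols p ∧ pvOkc grid rc rows cols q ∧ q ∈ pvNbrs p

def pvReach (grid : List (List Int)) (rc rows cols : Int) (s t : Int × Int) : Prop :=
  Relation.ReflTransGen (pvAdjc grid rc rows cols) s t

theorem pvNbrs_symm (p q : Int × Int) : q ∈ pvNbrs p ↔ p ∈ pvNbrs q := by
  simp only [pvNbrs, List.mem_cons, List.not_mem_nil, or_false, Prod.ext_iff]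
  omega

theorem pvAdjc_symm (grid : List (List Int)) (rc rows cols : Int) (p q : Int × Int)
    (h : pvAdjc grid rc rows cols p q) : pvAdjc grid rc rows cols q p :=
  ⟨h.2.1, h.1, (pvNbrs_symm p q).mp h.2.2⟩

theorem pvReach_symm (grid : List (List Int)) (rc rows cols : Int) (s t : Int × Int)
    (h : pvReach grid rc rows cols s t) : pvReach grid rc rows cols t s := by
  induction h with
  | refl => exact .refl
  | tail _ hstep ih => exact Relation.ReflTransGen.head (pvAdjc_symm _ _ _ _ _ _ hstep) ih

theorem pvReach_ok (grid : List (List Int)) (rc rows cols : Int) (seed p : Int × Int)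
    (hseed : pvOkc grid rc rows cols seed) (h : pvReach grid rc rows cols seed p) :
    pvOkc grid rc rows cols p := by
  induction h with
  | refl => exact hseed
  | tail _ hstep _ => exact hstep.2.1

-- marked cells of A's visited matrix
def pvMk (rows cols : Int) (V : List (List Bool)) (p : Int × Int) : Prop :=
  0 ≤ p.1 ∧ p.1 < rows ∧ 0 ≤ p.2 ∧ p.2 < cols ∧ pvReadB V p.1 p.2 true = true

def pvDims (rows cols : Int) (V : List (List Bool)) : Prop :=
  V.length = rows.toNat ∧ ∀ row ∈ V, row.length = cols.toNat

theorem pvDims_write (rows cols : Int) (V : List (List Bool)) (h : pvDims rows cols V)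
    (r c : Int) : pvDims rows cols (pvWriteB V r c) :=
  ⟨by rw [pvWriteB_length]; exact h.1, pvWriteB_rows _ _ _ _ h.2⟩

theorem pvMk_closed_rtg (grid : List (List Int)) (rc rows cols : Int) (V : List (List Bool))
    (hcl : ∀ a b, pvMk rows cols V a → pvAdjc grid rc rows cols a b → pvMk rows cols V b)
    (p q : Int × Int) (hp : pvMk rows cols V p) (h : pvReach grid rc rows cols p q) :
    pvMk rows cols V q := by
  induction h with
  | refl => exact hp
  | tail _ hstep ih => exact hcl _ _ ih hstep

theorem pvMk_write (rows cols : Int) (V : List (List Bool)) (hdims : pvDims rows cols V)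
    (t : Int × Int) (ht : 0 ≤ t.1 ∧ t.1 < rows ∧ 0 ≤ t.2 ∧ t.2 < cols) (p : Int × Int) :
    pvMk rows cols (pvWriteB V t.1 t.2) p ↔ (pvMk rows cols V p ∨ p = t) := by
  have hr : t.1.toNat < V.length := by rw [hdims.1]; omega
  have hc : t.2.toNat < V[t.1.toNat].length := by
    rw [hdims.2 _ (List.getElem_mem hr)]; omega
  constructor
  · rintro ⟨h1, h2, h3, h4, h5⟩
    by_cases hpt : p = t
    · right; exact hpt
    · left
      refine ⟨h1, h2, h3, h4, ?_⟩
      rw [← pvReadB_write_ne V t.1 t.2 p.1 p.2 true ht.1 ht.2.2.1 h1 h3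
        (fun hh => hpt (Prod.ext hh.1 hh.2))]
      exact h5
  · rintro (⟨h1, h2, h3, h4, h5⟩ | rfl)
    · by_cases hpt : p = t
      · subst hpt
        exact ⟨h1, h2, h3, h4, pvReadB_write_self V p.1 p.2 true ht.1 ht.2.2.1 hr hc⟩
      · refine ⟨h1, h2, h3, h4, ?_⟩
        rw [pvReadB_write_ne V t.1 t.2 p.1 p.2 true ht.1 ht.2.2.1 h1 h3
          (fun hh => hpt (Prod.ext hh.1 hh.2))]
        exact h5
    · exact ⟨ht.1, ht.2.1, ht.2.2.1, ht.2.2.2,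
        pvReadB_write_self V p.1 p.2 true ht.1 ht.2.2.1 hr hc⟩

theorem pvMk_init (rows cols : Int) (p : Int × Int) :
    ¬ pvMk rows cols (List.replicate rows.toNat (List.replicate cols.toNat false)) p := by
  rintro ⟨h1, h2, h3, h4, h5⟩
  rw [pvReadB_eq_getElem _ _ _ _ h1 h3 (by simp; omega)
    (by simp [List.getElem_replicate]; omega)] at h5
  simp [List.getElem_replicate] at h5

-- ===== characterization of A's neighbour pushes =====

theorem pvPushA_char (grid : List (List Int)) (rc rows cols cr cc : Int) (d : Int × Int)
    (st : List (List Bool) × List (Int × Int)) (hdims : pvDims rows cols st.1) :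
    pvDims rows cols (pvPushA grid rc rows cols cr cc st d).1 ∧
    (∀ p, pvMk rows cols (pvPushA grid rc rows cols cr cc st d).1 p ↔
      (pvMk rows cols st.1 p ∨
        (p = (cr + d.1, cc + d.2) ∧ pvOkc grid rc rows cols p ∧ ¬ pvMk rows cols st.1 p))) ∧
    (∀ p, p ∈ (pvPushA grid rc rows cols cr cc st d).2 ↔
      (p ∈ st.2 ∨
        (p = (cr + d.1, cc + d.2) ∧ pvOkc grid rc rows cols p ∧ ¬ pvMk rows cols st.1 p))) := by
  unfold pvPushA
  split
  · rename_i h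
    obtain ⟨h1, h2, h3, h4, h5, h6⟩ := h
    have hok : pvOkc grid rc rows cols (cr + d.1, cc + d.2) := ⟨h1, h2, h3, h4, h6⟩
    have hnm : ¬ pvMk rows cols st.1 (cr + d.1, cc + d.2) := by
      rintro ⟨_, _, _, _, hr5⟩
      rw [h5] at hr5
      exact Bool.false_ne_true hr5
    refine ⟨pvDims_write rows cols st.1 hdims _ _, ?_, ?_⟩
    · intro p
      rw [pvMk_write rows cols st.1 hdims (cr + d.1, cc + d.2) ⟨h1, h2, h3, h4⟩ p]
      constructor
      · rintro (h' | rfl)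
        · exact .inl h'
        · exact .inr ⟨rfl, hok, hnm⟩
      · rintro (h' | ⟨rfl, _, _⟩)
        · exact .inl h'
        · exact .inr rfl
    · intro p
      simp only [List.mem_cons]
      constructor
      · rintro (rfl | h')
        · exact .inr ⟨rfl, hok, hnm⟩
        · exact .inl h'
      · rintro (h' | ⟨rfl, _, _⟩)
        · exact .inr h'
        · exact .inl rfl
  · rename_i h
    have hcontra : pvOkc grid rc rows cols ((cr + d.1 : Int), (cc + d.2 : Int)) →
        ¬ pvMk rows cols st.1 ((cr + d.1 : Int), (cc + d.2 : Int)) → False := by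
      intro hok hnm
      have h5 : pvReadB st.1 (cr + d.1) (cc + d.2) true = false := by
        cases hx : pvReadB st.1 (cr + d.1) (cc + d.2) true
        · rfl
        · exact absurd ⟨hok.1, hok.2.1, hok.2.2.1, hok.2.2.2.1, hx⟩ hnm
      exact h ⟨hok.1, hok.2.1, hok.2.2.1, hok.2.2.2.1, h5, hok.2.2.2.2⟩
    refine ⟨hdims, ?_, ?_⟩
    · intro p
      constructor
      · exact fun h' => .inl h'
      · rintro (h' | ⟨rfl, hok, hnm⟩)
        · exact h'
        · exact (hcontra hok hnm).elim
    · intro p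
      constructor
      · exact fun h' => .inl h'
      · rintro (h' | ⟨rfl, hok, hnm⟩)
        · exact h'
        · exact (hcontra hok hnm).elim

theorem pvPushA_fold_char (grid : List (List Int)) (rc rows cols cr cc : Int) :
    ∀ (ds : List (Int × Int)) (st : List (List Bool) × List (Int × Int)),
      pvDims rows cols st.1 →
    pvDims rows cols (ds.foldl (pvPushA grid rc rows cols cr cc) st).1 ∧
    (∀ p, pvMk rows cols (ds.foldl (pvPushA grid rc rows cols cr cc) st).1 p ↔
      (pvMk rows cols st.1 p ∨
        (p ∈ ds.map (fun d => ((cr + d.1 : Int), (cc + d.2 : Int))) ∧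
          pvOkc grid rc rows cols p ∧ ¬ pvMk rows cols st.1 p))) ∧
    (∀ p, p ∈ (ds.foldl (pvPushA grid rc rows cols cr cc) st).2 ↔
      (p ∈ st.2 ∨
        (p ∈ ds.map (fun d => ((cr + d.1 : Int), (cc + d.2 : Int))) ∧
          pvOkc grid rc rows cols p ∧ ¬ pvMk rows cols st.1 p))) := by
  intro ds
  induction ds with
  | nil =>
    intro st hdims
    refine ⟨hdims, ?_, ?_⟩ <;> (intro p; simp)
  | cons d ds ih =>
    intro st hdims
    rw [List.foldl_cons]
    obtain ⟨hd1, hm1, hs1⟩ := pvPushA_char grid rc rows cols cr cc d st hdims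
    obtain ⟨hd2, hm2, hs2⟩ := ih (pvPushA grid rc rows cols cr cc st d) hd1
    refine ⟨hd2, ?_, ?_⟩
    · intro p
      rw [hm2 p, hm1 p]
      simp only [List.map_cons, List.mem_cons]
      tauto
    · intro p
      rw [hs2 p, hs1 p, hm1 p]
      simp only [List.map_cons, List.mem_cons]
      tauto

theorem pvTgts_nbrs (cr cc : Int) :
    ([((0:Int), (1:Int)), (0, -1), (1, 0), (-1, 0)].map
      (fun d => ((cr + d.1 : Int), (cc + d.2 : Int)))) = pvNbrs (cr, cc) := by
  simp only [List.map_cons, List.map_nil, pvNbrs]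
  norm_num
  omega

-- ===== reachability avoiding marked cells =====

def pvRAp (grid : List (List Int)) (rc rows cols : Int) (M : Int × Int → Prop)
    (s t : Int × Int) : Prop :=
  Relation.ReflTransGen (fun p q => pvAdjc grid rc rows cols p q ∧ ¬ M q) s t

theorem pvRA_trunc (grid : List (List Int)) (rc rows cols : Int)
    (M M' D : Int × Int → Prop) (hM' : ∀ p, M' p ↔ (M p ∨ D p)) (s t : Int × Int)
    (h : pvRAp grid rc rows cols M s t) (ht : ¬ M' t) :
    pvRAp grid rc rows cols M' s t ∨ ∃ w, D w ∧ pvRAp grid rc rows cols M' w t := by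
  induction h with
  | refl => exact .inl .refl
  | @tail b c hsb hstep ih =>
    by_cases hb : M' b
    · rcases (hM' b).mp hb with hMb | hDb
      · rcases Relation.ReflTransGen.cases_tail hsb with heq | ⟨m, _, hmb⟩
        · subst heq
          exact .inl (Relation.ReflTransGen.single ⟨hstep.1, ht⟩)
        · exact absurd hMb hmb.2
      · exact .inr ⟨b, hDb, Relation.ReflTransGen.single ⟨hstep.1, ht⟩⟩
    · rcases ih hb with h' | ⟨w, hw, h'⟩
      · exact .inl (h'.tail ⟨hstep.1, ht⟩)
      · exact .inr ⟨w, hw, h'.tail ⟨hstep.1, ht⟩⟩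

theorem pvReach_RA (grid : List (List Int)) (rc rows cols : Int) (M : Int × Int → Prop)
    (seed : Int × Int) (hM : ∀ p, M p → pvReach grid rc rows cols seed p → p = seed) :
    ∀ t, pvReach grid rc rows cols seed t →
      M t ∨ pvRAp grid rc rows cols M seed t := by
  intro t h
  induction h with
  | refl => exact .inr .refl
  | @tail b c hsb hstep ih =>
    by_cases hc : M c
    · exact .inl hc
    · right
      rcases ih with hMb | hRb
      · have hbs : b = seed := hM b hMb hsb
        subst hbs
        exact Relation.ReflTransGen.single ⟨hstep, hc⟩
      · exact hRb.tail ⟨hstep, hc⟩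

-- ===== extremum characterizations for the bounding boxes =====

def pvIsMin (v a : Int) (E : Int × Int → Prop) (f : Int × Int → Int) : Prop :=
  v ≤ a ∧ (∀ p, E p → v ≤ f p) ∧ (v = a ∨ ∃ p, E p ∧ v = f p)

def pvIsMax (v a : Int) (E : Int × Int → Prop) (f : Int × Int → Int) : Prop :=
  a ≤ v ∧ (∀ p, E p → f p ≤ v) ∧ (v = a ∨ ∃ p, E p ∧ v = f p)

theorem pvIsMin_shift (v a u1 : Int) (E E' : Int × Int → Prop) (f : Int × Int → Int)
    (u : Int × Int) (hE : ∀ p, E p ↔ (E' p ∨ p = u)) (hfu : f u = u1) (hEu : E u)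
    (h : pvIsMin v (min a u1) E' f) : pvIsMin v a E f := by
  obtain ⟨h1, h2, h3⟩ := h
  refine ⟨le_trans h1 (min_le_left _ _), ?_, ?_⟩
  · intro p hp
    rcases (hE p).mp hp with h' | rfl
    · exact h2 p h'
    · rw [hfu]; exact le_trans h1 (min_le_right _ _)
  · rcases h3 with h3 | ⟨p, hp, rfl⟩
    · rcases min_choice a u1 with hm | hm
      · exact .inl (by rw [h3, hm])
      · exact .inr ⟨u, hEu, by rw [h3, hm, hfu]⟩
    · exact .inr ⟨p, (hE p).mpr (.inl hp), rfl⟩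

theorem pvIsMax_shift (v a u1 : Int) (E E' : Int × Int → Prop) (f : Int × Int → Int)
    (u : Int × Int) (hE : ∀ p, E p ↔ (E' p ∨ p = u)) (hfu : f u = u1) (hEu : E u)
    (h : pvIsMax v (max a u1) E' f) : pvIsMax v a E f := by
  obtain ⟨h1, h2, h3⟩ := h
  refine ⟨le_trans (le_max_left _ _) h1, ?_, ?_⟩
  · intro p hp
    rcases (hE p).mp hp with h' | rfl
    · exact h2 p h'
    · rw [hfu]; exact le_trans (le_max_right _ _) h1
  · rcases h3 with h3 | ⟨p, hp, rfl⟩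
    · rcases max_choice a u1 with hm | hm
      · exact .inl (by rw [h3, hm])
      · exact .inr ⟨u, hEu, by rw [h3, hm, hfu]⟩
    · exact .inr ⟨p, (hE p).mpr (.inl hp), rfl⟩

theorem pvIsMin_conv (v a : Int) (f : Int × Int → Int) (C E : Int × Int → Prop)
    (seed : Int × Int) (hseedC : C seed)
    (hEC : ∀ p, E p → (C p ∨ p = seed)) (hCE : ∀ p, C p → (E p ∨ p = seed))
    (hfa : f seed = a) (h : pvIsMin v a E f) : pvIsMin v a C f := by
  obtain ⟨h1, h2, h3⟩ := h
  refine ⟨h1, ?_, ?_⟩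
  · intro p hp
    rcases hCE p hp with h' | rfl
    · exact h2 p h'
    · rw [hfa]; exact h1
  · rcases h3 with h3 | ⟨p, hp, rfl⟩
    · exact .inl h3
    · rcases hEC p hp with h' | rfl
      · exact .inr ⟨p, h', rfl⟩
      · exact .inl hfa
  
theorem pvIsMax_conv (v a : Int) (f : Int × Int → Int) (C E : Int × Int → Prop)
    (seed : Int × Int) (hseedC : C seed)
    (hEC : ∀ p, E p → (C p ∨ p = seed)) (hCE : ∀ p, C p → (E p ∨ p = seed))
    (hfa : f seed = a) (h : pvIsMax v a E f) : pvIsMax v a C f := by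
  obtain ⟨h1, h2, h3⟩ := h
  refine ⟨h1, ?_, ?_⟩
  · intro p hp
    rcases hCE p hp with h' | rfl
    · exact h2 p h'
    · rw [hfa]; exact h1
  · rcases h3 with h3 | ⟨p, hp, rfl⟩
    · exact .inl h3
    · rcases hEC p hp with h' | rfl
      · exact .inr ⟨p, h', rfl⟩
      · exact .inl hfa

theorem pvIsMin_attain (v a : Int) (f : Int × Int → Int) (C : Int × Int → Prop)
    (seed : Int × Int) (hseedC : C seed) (hfa : f seed = a)
    (h : pvIsMin v a C f) : ∃ p, C p ∧ v = f p := by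
  rcases h.2.2 with h' | h'
  · exact ⟨seed, hseedC, by rw [h', hfa]⟩
  · exact h'

theorem pvIsMax_attain (v a : Int) (f : Int × Int → Int) (C : Int × Int → Prop)
    (seed : Int × Int) (hseedC : C seed) (hfa : f seed = a)
    (h : pvIsMax v a C f) : ∃ p, C p ∧ v = f p := by
  rcases h.2.2 with h' | h'
  · exact ⟨seed, hseedC, by rw [h', hfa]⟩
  · exact h'

-- cells still to be popped by A's flood loop
def pvE (grid : List (List Int)) (rc rows cols : Int) (seed : Int × Int)
    (V : List (List Bool)) (S : List (Int × Int)) (p : Int × Int) : Prop :=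
  p ∈ S ∨ (pvReach grid rc rows cols seed p ∧ ¬ pvMk rows cols V p)

-- ===== the flood-fill characterization (A's DFS computes the reachability class) =====

theorem pvFloodA_inv (grid : List (List Int)) (rc rows cols : Int) (seed : Int × Int)
    (V0 : List (List Bool)) (hseed : pvOkc grid rc rows cols seed) :
    ∀ (V : List (List Bool)) (S : List (Int × Int)) (mr xr mc xc : Int),
      pvDims rows cols V →
      (∀ p ∈ S, pvReach grid rc rows cols seed p ∧ pvMk rows cols V p) →
      (∀ p, pvMk rows cols V p → (pvMk rows cols V0 p ∨ pvReach grid rc rows cols seed p)) →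
      (∀ p, pvMk rows cols V0 p → pvMk rows cols V p) →
      (∀ t, pvReach grid rc rows cols seed t → pvMk rows cols V t ∨
        ∃ s ∈ S, pvRAp grid rc rows cols (pvMk rows cols V) s t) →
      pvDims rows cols (pvFloodA grid rc rows cols V S mr xr mc xc).1 ∧
      (∀ p, pvMk rows cols (pvFloodA grid rc rows cols V S mr xr mc xc).1 p ↔
        (pvMk rows cols V p ∨ pvReach grid rc rows cols seed p)) ∧
      pvIsMin (pvFloodA grid rc rows cols V S mr xr mc xc).2.1 mr
        (pvE grid rc rows cols seed V S) Prod.fst ∧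
      pvIsMax (pvFloodA grid rc rows cols V S mr xr mc xc).2.2.1 xr
        (pvE grid rc rows cols seed V S) Prod.fst ∧
      pvIsMin (pvFloodA grid rc rows cols V S mr xr mc xc).2.2.2.1 mc
        (pvE grid rc rows cols seed V S) Prod.snd ∧
      pvIsMax (pvFloodA grid rc rows cols V S mr xr mc xc).2.2.2.2 xc
        (pvE grid rc rows cols seed V S) Prod.snd := by
  intro V S mr xr mc xc
  induction V, S, mr, xr, mc, xc using pvFloodA.induct grid rc rows cols with
  | case1 vis mr xr mc xc =>
    intro hdims hS hnew hmono hreach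
    have hres : pvFloodA grid rc rows cols vis [] mr xr mc xc = (vis, mr, xr, mc, xc) := by
      rw [pvFloodA.eq_def]
    rw [hres]
    have hEmpty : ∀ p, ¬ pvE grid rc rows cols seed vis [] p := by
      rintro p (hp | ⟨hrp, hnm⟩)
      · cases hp
      · rcases hreach p hrp with hm | ⟨s, hs, _⟩
        · exact hnm hm
        · cases hs
    refine ⟨hdims, ?_, ?_, ?_, ?_, ?_⟩
    · intro p
      constructor
      · exact fun h => .inl h
      · rintro (h | h)
        · exact h
        · rcases hreach p h with hm | ⟨s, hs, _⟩
          · exact hm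
          · cases hs
    all_goals exact ⟨le_refl _, fun p hp => absurd hp (hEmpty p), .inl rfl⟩
  | case2 vis mr xr mc xc cr cc rest sF ih =>
    intro hdims hS hnew hmono hreach
    obtain ⟨hd1, hm1, hs1⟩ := pvPushA_fold_char grid rc rows cols cr cc
      [((0:Int), (1:Int)), (0, -1), (1, 0), (-1, 0)] (vis, rest) hdims
    rw [pvTgts_nbrs cr cc] at hm1 hs1
    have hu := hS (cr, cc) List.mem_cons_self
    have hoku : pvOkc grid rc rows cols (cr, cc) :=
      pvReach_ok grid rc rows cols seed (cr, cc) hseed hu.1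
    have hNreach : ∀ p, p ∈ pvNbrs (cr, cc) → pvOkc grid rc rows cols p →
        pvReach grid rc rows cols seed p := fun p hn hok => hu.1.tail ⟨hoku, hok, hn⟩
    have hS' : ∀ p ∈ ([((0:Int), (1:Int)), (0, -1), (1, 0), (-1, 0)].foldl
        (pvPushA grid rc rows cols cr cc) (vis, rest)).2,
        pvReach grid rc rows cols seed p ∧
        pvMk rows cols ([((0:Int), (1:Int)), (0, -1), (1, 0), (-1, 0)].foldl
          (pvPushA grid rc rows cols cr cc) (vis, rest)).1 p := by
      intro p hp
      rcases (hs1 p).mp hp with h | ⟨hn, hok2, hnm⟩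
      · exact ⟨(hS p (List.mem_cons_of_mem _ h)).1,
          (hm1 p).mpr (.inl (hS p (List.mem_cons_of_mem _ h)).2)⟩
      · exact ⟨hNreach p hn hok2, (hm1 p).mpr (.inr ⟨hn, hok2, hnm⟩)⟩
    have hnew' : ∀ p, pvMk rows cols ([((0:Int), (1:Int)), (0, -1), (1, 0), (-1, 0)].foldl
        (pvPushA grid rc rows cols cr cc) (vis, rest)).1 p →
        pvMk rows cols V0 p ∨ pvReach grid rc rows cols seed p := by
      intro p hp
      rcases (hm1 p).mp hp with h | ⟨hn, hok2, _⟩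
      · exact hnew p h
      · exact .inr (hNreach p hn hok2)
    have hmono' : ∀ p, pvMk rows cols V0 p →
        pvMk rows cols ([((0:Int), (1:Int)), (0, -1), (1, 0), (-1, 0)].foldl
          (pvPushA grid rc rows cols cr cc) (vis, rest)).1 p :=
      fun p h => (hm1 p).mpr (.inl (hmono p h))
    have hreach' : ∀ t, pvReach grid rc rows cols seed t →
        pvMk rows cols ([((0:Int), (1:Int)), (0, -1), (1, 0), (-1, 0)].foldl
          (pvPushA grid rc rows cols cr cc) (vis, rest)).1 t ∨
        ∃ s ∈ ([((0:Int), (1:Int)), (0, -1), (1, 0), (-1, 0)].foldl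
          (pvPushA grid rc rows cols cr cc) (vis, rest)).2,
          pvRAp grid rc rows cols (pvMk rows cols
            ([((0:Int), (1:Int)), (0, -1), (1, 0), (-1, 0)].foldl
              (pvPushA grid rc rows cols cr cc) (vis, rest)).1) s t := by
      intro t ht
      by_cases hmt : pvMk rows cols ([((0:Int), (1:Int)), (0, -1), (1, 0), (-1, 0)].foldl
          (pvPushA grid rc rows cols cr cc) (vis, rest)).1 t
      · exact .inl hmt
      · right
        rcases hreach t ht with hMk | ⟨s0, hs0, hRA⟩
        · exact (hmt ((hm1 t).mpr (.inl hMk))).elim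
        · rcases pvRA_trunc grid rc rows cols (pvMk rows cols vis)
            (pvMk rows cols ([((0:Int), (1:Int)), (0, -1), (1, 0), (-1, 0)].foldl
              (pvPushA grid rc rows cols cr cc) (vis, rest)).1)
            (fun p => p ∈ pvNbrs (cr, cc) ∧ pvOkc grid rc rows cols p ∧
              ¬ pvMk rows cols vis p)
            hm1 s0 t hRA hmt with hR' | ⟨w, hw, hR'⟩
          · rcases List.mem_cons.mp hs0 with heq | hs0r
            · subst heq
              rcases Relation.ReflTransGen.cases_head hR' with heq2 | ⟨b, ⟨hadj, hnb⟩, hbt⟩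
              · exact (hmt ((hm1 t).mpr (.inl (heq2 ▸ hu.2)))).elim
              · exact ⟨b, (hs1 b).mpr (.inr ⟨hadj.2.2, hadj.2.1,
                  fun hh => hnb ((hm1 b).mpr (.inl hh))⟩), hbt⟩
            · exact ⟨s0, (hs1 s0).mpr (.inl hs0r), hR'⟩
          · exact ⟨w, (hs1 w).mpr (.inr hw), hR'⟩
    have hIH := ih hd1 hS' hnew' hmono' hreach'
    have hres : pvFloodA grid rc rows cols vis ((cr, cc) :: rest) mr xr mc xc =
        pvFloodA grid rc rows cols
          ([((0:Int), (1:Int)), (0, -1), (1, 0), (-1, 0)].foldl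
            (pvPushA grid rc rows cols cr cc) (vis, rest)).1
          ([((0:Int), (1:Int)), (0, -1), (1, 0), (-1, 0)].foldl
            (pvPushA grid rc rows cols cr cc) (vis, rest)).2
          (min mr cr) (max xr cr) (min mc cc) (max xc cc) := by
      rw [pvFloodA.eq_def]
    rw [hres]
    have hEE : ∀ p, pvE grid rc rows cols seed vis ((cr, cc) :: rest) p ↔
        (pvE grid rc rows cols seed
          ([((0:Int), (1:Int)), (0, -1), (1, 0), (-1, 0)].foldl
            (pvPushA grid rc rows cols cr cc) (vis, rest)).1
          ([((0:Int), (1:Int)), (0, -1), (1, 0), (-1, 0)].foldl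
            (pvPushA grid rc rows cols cr cc) (vis, rest)).2 p ∨ p = (cr, cc)) := by
      intro p
      unfold pvE
      rw [hs1 p, hm1 p]
      simp only [List.mem_cons]
      constructor
      · rintro ((rfl | h) | ⟨hrp, hnm⟩)
        · exact .inr rfl
        · exact .inl (.inl (.inl h))
        · by_cases hN : p ∈ pvNbrs (cr, cc) ∧ pvOkc grid rc rows cols p ∧
              ¬ pvMk rows cols vis p
          · exact .inl (.inl (.inr hN))
          · exact .inl (.inr ⟨hrp, fun hh => by
              rcases hh with h' | h'
              · exact hnm h'
              · exact hN h'⟩)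
      · rintro (((h | hN) | ⟨hrp, hnm⟩) | rfl)
        · exact .inl (.inr h)
        · exact .inr ⟨hNreach p hN.1 hN.2.1, hN.2.2⟩
        · exact .inr ⟨hrp, fun hh => hnm (.inl hh)⟩
        · exact .inl (.inl rfl)
    obtain ⟨hihd, hihm, hih1, hih2, hih3, hih4⟩ := hIH
    refine ⟨hihd, ?_, ?_, ?_, ?_, ?_⟩
    · intro p
      rw [hihm p, hm1 p]
      constructor
      · rintro ((h | ⟨hn, hok2, _⟩) | h)
        · exact .inl h
        · exact .inr (hNreach p hn hok2)
        · exact .inr h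
      · rintro (h | h)
        · exact .inl (.inl h)
        · exact .inr h
    · exact pvIsMin_shift _ mr cr _ _ Prod.fst (cr, cc) hEE rfl (.inl List.mem_cons_self) hih1
    · exact pvIsMax_shift _ xr cr _ _ Prod.fst (cr, cc) hEE rfl (.inl List.mem_cons_self) hih2
    · exact pvIsMin_shift _ mc cc _ _ Prod.snd (cr, cc) hEE rfl (.inl List.mem_cons_self) hih3
    · exact pvIsMax_shift _ xc cc _ _ Prod.snd (cr, cc) hEE rfl (.inl List.mem_cons_self) hih4

theorem pvFloodA_spec (grid : List (List Int)) (rc rows cols : Int) (seed : Int × Int)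
    (V : List (List Bool)) (hdims : pvDims rows cols V)
    (hseed : pvOkc grid rc rows cols seed)
    (hdis : ∀ p, pvReach grid rc rows cols seed p → ¬ pvMk rows cols V p) :
    pvDims rows cols
      (pvFloodA grid rc rows cols (pvWriteB V seed.1 seed.2) [seed] seed.1 seed.1 seed.2 seed.2).1 ∧
    (∀ p, pvMk rows cols
        (pvFloodA grid rc rows cols (pvWriteB V seed.1 seed.2) [seed] seed.1 seed.1 seed.2 seed.2).1 p ↔
      (pvMk rows cols V p ∨ pvReach grid rc rows cols seed p)) ∧
    pvIsMin (pvFloodA grid rc rows cols (pvWriteB V seed.1 seed.2) [seed] seed.1 seed.1 seed.2 seed.2).2.1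
      seed.1 (pvReach grid rc rows cols seed) Prod.fst ∧
    pvIsMax (pvFloodA grid rc rows cols (pvWriteB V seed.1 seed.2) [seed] seed.1 seed.1 seed.2 seed.2).2.2.1
      seed.1 (pvReach grid rc rows cols seed) Prod.fst ∧
    pvIsMin (pvFloodA grid rc rows cols (pvWriteB V seed.1 seed.2) [seed] seed.1 seed.1 seed.2 seed.2).2.2.2.1
      seed.2 (pvReach grid rc rows cols seed) Prod.snd ∧
    pvIsMax (pvFloodA grid rc rows cols (pvWriteB V seed.1 seed.2) [seed] seed.1 seed.1 seed.2 seed.2).2.2.2.2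
      seed.2 (pvReach grid rc rows cols seed) Prod.snd := by
  have hb : 0 ≤ seed.1 ∧ seed.1 < rows ∧ 0 ≤ seed.2 ∧ seed.2 < cols :=
    ⟨hseed.1, hseed.2.1, hseed.2.2.1, hseed.2.2.2.1⟩
  have hW := pvMk_write rows cols V hdims seed hb
  have hdimsW := pvDims_write rows cols V hdims seed.1 seed.2
  have hMkWseed : pvMk rows cols (pvWriteB V seed.1 seed.2) seed := (hW seed).mpr (.inr rfl)
  have hreach0 : ∀ t, pvReach grid rc rows cols seed t →
      pvMk rows cols (pvWriteB V seed.1 seed.2) t ∨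
      ∃ s ∈ [seed], pvRAp grid rc rows cols (pvMk rows cols (pvWriteB V seed.1 seed.2)) s t := by
    intro t ht
    rcases pvReach_RA grid rc rows cols (pvMk rows cols (pvWriteB V seed.1 seed.2)) seed
      (fun p hp hrp => by
        rcases (hW p).mp hp with hv | hps
        · exact absurd hv (hdis p hrp)
        · exact hps) t ht with h | h
    · exact .inl h
    · exact .inr ⟨seed, List.mem_cons_self, h⟩
  have hinv := pvFloodA_inv grid rc rows cols seed V hseed (pvWriteB V seed.1 seed.2)
      [seed] seed.1 seed.1 seed.2 seed.2 hdimsW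
      (by
        intro p hp
        rw [List.mem_singleton] at hp
        subst hp
        exact ⟨.refl, hMkWseed⟩)
      (by
        intro p hp
        rcases (hW p).mp hp with h | rfl
        · exact .inl h
        · exact .inr .refl)
      (fun p h => (hW p).mpr (.inl h))
      hreach0
  obtain ⟨hd, hmk, h1, h2, h3, h4⟩ := hinv
  have hEC : ∀ p, pvE grid rc rows cols seed (pvWriteB V seed.1 seed.2) [seed] p →
      (pvReach grid rc rows cols seed p ∨ p = seed) := by
    rintro p (hp | ⟨hp, _⟩)
    · rw [List.mem_singleton] at hp
      exact .inr hp
    · exact .inl hp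
  have hCE : ∀ p, pvReach grid rc rows cols seed p →
      (pvE grid rc rows cols seed (pvWriteB V seed.1 seed.2) [seed] p ∨ p = seed) := by
    intro p hp
    by_cases hm : pvMk rows cols (pvWriteB V seed.1 seed.2) p
    · rcases (hW p).mp hm with hv | hps
      · exact absurd hv (hdis p hp)
      · exact .inr hps
    · exact .inl (.inr ⟨hp, hm⟩)
  refine ⟨hd, ?_, ?_, ?_, ?_, ?_⟩
  · intro p
    rw [hmk p, hW p]
    constructor
    · rintro ((h | rfl) | h)
      · exact .inl h
      · exact .inr .refl
      · exact .inr h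
    · rintro (h | h)
      · exact .inl (.inl h)
      · exact .inr h
  · exact pvIsMin_conv _ _ Prod.fst _ _ seed .refl hEC hCE rfl h1
  · exact pvIsMax_conv _ _ Prod.fst _ _ seed .refl hEC hCE rfl h2
  · exact pvIsMin_conv _ _ Prod.snd _ _ seed .refl hEC hCE rfl h3
  · exact pvIsMax_conv _ _ Prod.snd _ _ seed .refl hEC hCE rfl h4

-- ===== B's dilation fixpoint computes the same reachability class =====

theorem pvMem_foldl_addif {G : Int × Int → Prop} [DecidablePred G] :
    ∀ (l : List (Int × Int)) (s : PySem.Set (Int × Int)) (x : Int × Int),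
    (x ∈ l.foldl (fun s q => if G q then PySem.Set.add s q else s) s ↔
      (x ∈ s ∨ (x ∈ l ∧ G x))) := by
  intro l
  induction l with
  | nil => intro s x; simp
  | cons q t ih =>
    intro s x
    rw [List.foldl_cons, ih]
    by_cases hG : G q
    · rw [if_pos hG, PySem.Set.mem_add]
      constructor
      · rintro ((h | rfl) | ⟨ht, hx⟩)
        · exact .inl h
        · exact .inr ⟨List.mem_cons_self, hG⟩
        · exact .inr ⟨List.mem_cons_of_mem _ ht, hx⟩
      · rintro (h | ⟨hm, hx⟩)
        · exact .inl (.inl h)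
        · rcases List.mem_cons.mp hm with rfl | ht
          · exact .inl (.inr rfl)
          · exact .inr ⟨ht, hx⟩
    · rw [if_neg hG]
      constructor
      · rintro (h | ⟨ht, hx⟩)
        · exact .inl h
        · exact .inr ⟨List.mem_cons_of_mem _ ht, hx⟩
      · rintro (h | ⟨hm, hx⟩)
        · exact .inl h
        · rcases List.mem_cons.mp hm with rfl | ht
          · exact absurd hx hG
          · exact .inr ⟨ht, hx⟩

theorem pvMem_dilStep (grid : List (List Int)) (rc rows cols : Int)
    (s : PySem.Set (Int × Int)) (p x : Int × Int) :
    x ∈ pvDilStep grid rc rows cols s p ↔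
      (x ∈ s ∨ (x ∈ pvNbrs p ∧ pvOkc grid rc rows cols x)) := by
  unfold pvDilStep
  rw [pvMem_foldl_addif
    (G := fun q => 0 ≤ q.1 ∧ q.1 < rows ∧ 0 ≤ q.2 ∧ q.2 < cols ∧ pvCellI grid q.1 q.2 = rc)]
  exact Iff.rfl

theorem pvMem_dilate (grid : List (List Int)) (rc rows cols : Int)
    (comp : PySem.Set (Int × Int)) (x : Int × Int) :
    x ∈ pvDilate grid rc rows cols comp ↔
      (x ∈ comp ∨ ∃ p ∈ comp, x ∈ pvNbrs p ∧ pvOkc grid rc rows cols x) := by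
  unfold pvDilate
  suffices h : ∀ (l : List (Int × Int)) (s : PySem.Set (Int × Int)),
      (x ∈ l.foldl (pvDilStep grid rc rows cols) s ↔
        (x ∈ s ∨ ∃ p ∈ l, x ∈ pvNbrs p ∧ pvOkc grid rc rows cols x)) by
    exact h comp comp
  intro l
  induction l with
  | nil => intro s; simp
  | cons p t ih =>
    intro s
    rw [List.foldl_cons, ih, pvMem_dilStep]
    simp only [List.mem_cons]
    constructor
    · rintro ((h | ⟨h1, h2⟩) | ⟨p', hp', h3⟩)
      · exact .inl h
      · exact .inr ⟨p, .inl rfl, h1, h2⟩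
      · exact .inr ⟨p', .inr hp', h3⟩
    · rintro (h | ⟨p', (rfl | hp'), h3⟩)
      · exact .inl (.inl h)
      · exact .inl (.inr h3)
      · exact .inr ⟨p', hp', h3⟩

theorem pvAddif_extends {G : Int × Int → Prop} [DecidablePred G] :
    ∀ (l : List (Int × Int)) (s : PySem.Set (Int × Int)),
    ∃ t, l.foldl (fun s q => if G q then PySem.Set.add s q else s) s = s ++ t := by
  intro l
  induction l with
  | nil => intro s; exact ⟨[], by simp⟩
  | cons q t ih =>
    intro s
    rw [List.foldl_cons]
    have hstep : ∃ t0, (if G q then PySem.Set.add s q else s) = s ++ t0 := by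
      by_cases hG : G q
      · rw [if_pos hG]
        unfold PySem.Set.add
        split
        · exact ⟨[], by simp⟩
        · exact ⟨[q], rfl⟩
      · rw [if_neg hG]; exact ⟨[], by simp⟩
    obtain ⟨t0, ht0⟩ := hstep
    obtain ⟨t1, ht1⟩ := ih (s ++ t0)
    exact ⟨t0 ++ t1, by rw [ht0, ht1, List.append_assoc]⟩

theorem pvDilStep_extends (grid : List (List Int)) (rc rows cols : Int)
    (s : PySem.Set (Int × Int)) (p : Int × Int) :
    ∃ t, pvDilStep grid rc rows cols s p = s ++ t := by
  unfold pvDilStep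
  exact pvAddif_extends
    (G := fun q => 0 ≤ q.1 ∧ q.1 < rows ∧ 0 ≤ q.2 ∧ q.2 < cols ∧ pvCellI grid q.1 q.2 = rc)
    (pvNbrs p) s

theorem pvDilate_extends (grid : List (List Int)) (rc rows cols : Int)
    (comp : PySem.Set (Int × Int)) :
    ∃ t, pvDilate grid rc rows cols comp = comp ++ t := by
  unfold pvDilate
  suffices h : ∀ (l : List (Int × Int)) (s : PySem.Set (Int × Int)),
      ∃ t, l.foldl (pvDilStep grid rc rows cols) s = s ++ t by exact h comp comp
  intro l
  induction l with
  | nil => intro s; exact ⟨[], by simp⟩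
  | cons p t ih =>
    intro s
    rw [List.foldl_cons]
    obtain ⟨t0, ht0⟩ := pvDilStep_extends grid rc rows cols s p
    obtain ⟨t1, ht1⟩ := ih (pvDilStep grid rc rows cols s p)
    exact ⟨t0 ++ t1, by rw [ht1, ht0, List.append_assoc]⟩

theorem pvDilate_fix_of_len (grid : List (List Int)) (rc rows cols : Int)
    (comp : PySem.Set (Int × Int))
    (h : (pvDilate grid rc rows cols comp).length = comp.length) :
    pvDilate grid rc rows cols comp = comp := by
  obtain ⟨t, ht⟩ := pvDilate_extends grid rc rows cols comp
  rw [ht] at h ⊢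
  rw [List.length_append] at h
  have : t = [] := List.eq_nil_of_length_eq_zero (by omega)
  simp [this]

theorem pvGrow_spec (grid : List (List Int)) (rc rows cols : Int) (C : Int × Int → Prop)
    (hC : ∀ p q, C p → q ∈ pvNbrs p → pvOkc grid rc rows cols q → C q) :
    ∀ (comp : PySem.Set (Int × Int)), (∀ x ∈ comp, C x) →
      (∀ x ∈ pvGrow grid rc rows cols comp, C x) ∧
      (∀ x ∈ comp, x ∈ pvGrow grid rc rows cols comp) ∧
      pvDilate grid rc rows cols (pvGrow grid rc rows cols comp) =
        pvGrow grid rc rows cols comp := by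
  intro comp
  induction comp using pvGrow.induct grid rc rows cols with
  | case1 x g hg =>
    intro hsub
    have hg' : (pvDilate grid rc rows cols x).length = x.length := hg
    have hres : pvGrow grid rc rows cols x = x := by
      rw [pvGrow.eq_def]
      simp only [hg', if_true]
    rw [hres]
    exact ⟨hsub, fun y hy => hy, pvDilate_fix_of_len grid rc rows cols x hg'⟩
  | case2 x g hg ih =>
    intro hsub
    have hg' : ¬ (pvDilate grid rc rows cols x).length = x.length := hg
    have hres : pvGrow grid rc rows cols x =
        pvGrow grid rc rows cols (pvDilate grid rc rows cols x) := by
      rw [pvGrow.eq_def]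
      simp only [hg', if_false]
    have hsub' : ∀ y ∈ pvDilate grid rc rows cols x, C y := by
      intro y hy
      rcases (pvMem_dilate grid rc rows cols x y).mp hy with h | ⟨p, hp, hn, hok⟩
      · exact hsub y h
      · exact hC p y (hsub p hp) hn hok
    obtain ⟨h1, h2, h3⟩ := ih hsub'
    rw [hres]
    exact ⟨h1, fun y hy => h2 y ((pvMem_dilate grid rc rows cols x y).mpr (Or.inl hy)), h3⟩

theorem pvGrow_reach (grid : List (List Int)) (rc rows cols : Int) (seed : Int × Int)
    (hseed : pvOkc grid rc rows cols seed) :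
    ∀ x, x ∈ pvGrow grid rc rows cols (PySem.Set.add PySem.Set.empty seed) ↔
      pvReach grid rc rows cols seed x := by
  have hinit : ∀ y ∈ PySem.Set.add PySem.Set.empty seed, pvReach grid rc rows cols seed y := by
    intro y hy
    have hys : y = seed := by
      simpa [PySem.Set.add, PySem.Set.empty] using hy
    subst hys
    exact .refl
  have hCcl : ∀ p q, pvReach grid rc rows cols seed p → q ∈ pvNbrs p →
      pvOkc grid rc rows cols q → pvReach grid rc rows cols seed q :=
    fun p q hp hn hok => hp.tail ⟨pvReach_ok grid rc rows cols seed p hseed hp, hok, hn⟩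
  have hgs := pvGrow_spec grid rc rows cols (pvReach grid rc rows cols seed) hCcl _ hinit
  have hseedin : seed ∈ pvGrow grid rc rows cols (PySem.Set.add PySem.Set.empty seed) :=
    hgs.2.1 seed (by simp [PySem.Set.add, PySem.Set.empty])
  have hclosed : ∀ p q, p ∈ pvGrow grid rc rows cols (PySem.Set.add PySem.Set.empty seed) →
      pvAdjc grid rc rows cols p q →
      q ∈ pvGrow grid rc rows cols (PySem.Set.add PySem.Set.empty seed) := by
    intro p q hp hadj
    have hq : q ∈ pvDilate grid rc rows cols
        (pvGrow grid rc rows cols (PySem.Set.add PySem.Set.empty seed)) :=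
      (pvMem_dilate grid rc rows cols _ q).mpr (Or.inr ⟨p, hp, hadj.2.2, hadj.2.1⟩)
    rwa [hgs.2.2] at hq
  intro x
  constructor
  · exact fun hx => hgs.1 x hx
  · intro hx
    induction hx with
    | refl => exact hseedin
    | tail _ hstep ih2 => exact hclosed _ _ ih2 hstep

-- min/max of a nonempty list (Source B's min(...)/max(...))
theorem pvMinD_id_spec (l : List Int) (d : Int) (h : l ≠ []) :
    PySem.List.minD l (fun x => x) d ∈ l ∧ ∀ x ∈ l, PySem.List.minD l (fun x => x) d ≤ x := by
  cases hm : PySem.List.min? l (fun x => x) with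
  | none => exact absurd ((PySem.List.min?_eq_none_iff _ _).mp hm) h
  | some m =>
    have hval : PySem.List.minD l (fun x => x) d = m := by
      unfold PySem.List.minD
      rw [hm]
      rfl
    rw [hval]
    exact ⟨PySem.List.min?_mem hm, fun x hx => PySem.List.min?_isMin hm x hx⟩

theorem pvMaxD_id_spec (l : List Int) (d : Int) (h : l ≠ []) :
    PySem.List.maxD l (fun x => x) d ∈ l ∧ ∀ x ∈ l, x ≤ PySem.List.maxD l (fun x => x) d := by
  cases hm : PySem.List.max? l (fun x => x) with
  | none => exact absurd ((PySem.List.max?_eq_none_iff _ _).mp hm) h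
  | some m =>
    have hval : PySem.List.maxD l (fun x => x) d = m := by
      unfold PySem.List.maxD
      rw [hm]
      rfl
    rw [hval]
    exact ⟨PySem.List.max?_mem hm, fun x hx => PySem.List.max?_isMax hm x hx⟩

theorem pvMinEq (v a : Int) (C : Int × Int → Prop) (f : Int × Int → Int)
    (comp : List (Int × Int)) (hC : ∀ x, x ∈ comp ↔ C x)
    (seed : Int × Int) (hseedC : C seed) (hfa : f seed = a)
    (hA : pvIsMin v a C f) :
    v = PySem.List.minD (comp.map f) (fun x => x) 0 := by
  have hne : comp.map f ≠ [] := by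
    have : seed ∈ comp := (hC seed).mpr hseedC
    exact fun hh => by simp [List.map_eq_nil_iff.mp hh] at this
  obtain ⟨hmem, hlb⟩ := pvMinD_id_spec (comp.map f) 0 hne
  obtain ⟨p, hp, hpe⟩ := List.mem_map.mp hmem
  apply le_antisymm
  · rw [← hpe]
    exact hA.2.1 p ((hC p).mp hp)
  · obtain ⟨q, hq, hvq⟩ := pvIsMin_attain v a f C seed hseedC hfa hA
    rw [hvq]
    exact hlb (f q) (List.mem_map.mpr ⟨q, (hC q).mpr hq, rfl⟩)

theorem pvMaxEq (v a : Int) (C : Int × Int → Prop) (f : Int × Int → Int)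
    (comp : List (Int × Int)) (hC : ∀ x, x ∈ comp ↔ C x)
    (seed : Int × Int) (hseedC : C seed) (hfa : f seed = a)
    (hA : pvIsMax v a C f) :
    v = PySem.List.maxD (comp.map f) (fun x => x) 0 := by
  have hne : comp.map f ≠ [] := by
    have : seed ∈ comp := (hC seed).mpr hseedC
    exact fun hh => by simp [List.map_eq_nil_iff.mp hh] at this
  obtain ⟨hmem, hub⟩ := pvMaxD_id_spec (comp.map f) 0 hne
  obtain ⟨p, hp, hpe⟩ := List.mem_map.mp hmem
  apply le_antisymm
  · obtain ⟨q, hq, hvq⟩ := pvIsMax_attain v a f C seed hseedC hfa hA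
    rw [hvq]
    exact hub (f q) (List.mem_map.mpr ⟨q, (hC q).mpr hq, rfl⟩)
  · rw [← hpe]
    exact hA.2.1 p ((hC p).mp hp)

-- ===== the scan loops agree =====

theorem pvFoldlRel {α β γ : Type} (R : α → β → Prop) (f : α → γ → α) (g : β → γ → β) :
    ∀ (l : List γ), (∀ a b x, x ∈ l → R a b → R (f a x) (g b x)) →
    ∀ a b, R a b → R (l.foldl f a) (l.foldl g b) := by
  intro l
  induction l with
  | nil => intro _ a b hab; exact hab
  | cons x xs ih =>
    intro h a b hab
    simp only [List.foldl_cons]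
    exact ih (fun a b y hy => h a b y (List.mem_cons_of_mem x hy)) _ _
      (h a b x List.mem_cons_self hab)

def pvRectIn (rows cols : Int) (q : Int × Int × Int × Int) : Prop :=
  0 ≤ q.1 ∧ q.1 < rows ∧ 0 ≤ q.2.1 ∧ q.2.1 < cols ∧ 0 ≤ q.2.2.1 ∧ q.2.2.1 < rows ∧
  0 ≤ q.2.2.2 ∧ q.2.2.2 < cols ∧ q.1 ≤ q.2.2.1 ∧ q.2.1 ≤ q.2.2.2

def pvRelScan (grid : List (List Int)) (rc rows cols : Int)
    (stA : List (List Bool) × List (Int × Int × Int × Int))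
    (stB : PySem.Set (Int × Int) × List (Int × Int × Int × Int)) : Prop :=
  pvDims rows cols stA.1 ∧
  (∀ p, stB.1.contains p = true ↔ pvMk rows cols stA.1 p) ∧
  (∀ p, pvMk rows cols stA.1 p → pvOkc grid rc rows cols p) ∧
  (∀ p q, pvMk rows cols stA.1 p → pvAdjc grid rc rows cols p q → pvMk rows cols stA.1 q) ∧
  stA.2 = stB.2 ∧ (∀ q ∈ stA.2, pvRectIn rows cols q)

theorem pvScanStep (grid : List (List Int)) (rc rows cols r c : Int)
    (hr : 0 ≤ r ∧ r < rows) (hc : 0 ≤ c ∧ c < cols)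
    (stA : List (List Bool) × List (Int × Int × Int × Int))
    (stB : PySem.Set (Int × Int) × List (Int × Int × Int × Int))
    (hrel : pvRelScan grid rc rows cols stA stB) :
    pvRelScan grid rc rows cols
      (if pvCellI grid r c = rc ∧ pvReadB stA.1 r c true = false then
        (let res := pvFloodA grid rc rows cols (pvWriteB stA.1 r c) [(r, c)] r r c c
         (res.1, stA.2 ++ [(res.2.1, res.2.2.2.1, res.2.2.1, res.2.2.2.2)]))
      else stA)
      (if pvCellI grid r c = rc ∧ ¬stB.1.contains (r, c) = true then
        (let comp := pvGrow grid rc rows cols (PySem.Set.add PySem.Set.empty (r, c))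
         let rs := comp.map Prod.fst
         let cs := comp.map Prod.snd
         (PySem.Set.union stB.1 comp,
          stB.2 ++ [(PySem.List.minD rs (fun x => x) 0, PySem.List.minD cs (fun x => x) 0,
                     PySem.List.maxD rs (fun x => x) 0, PySem.List.maxD cs (fun x => x) 0)]))
      else stB) := by
  obtain ⟨hdims, hcont, hok, hcl, hrects, hbnd⟩ := hrel
  have hguard : (pvCellI grid r c = rc ∧ pvReadB stA.1 r c true = false) ↔
      (pvCellI grid r c = rc ∧ ¬stB.1.contains (r, c) = true) := by
    constructor
    · rintro ⟨h1, h2⟩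
      refine ⟨h1, fun hcon => ?_⟩
      have hm := ((hcont (r, c)).mp hcon).2.2.2.2
      rw [h2] at hm
      exact Bool.false_ne_true hm
    · rintro ⟨h1, h2⟩
      refine ⟨h1, ?_⟩
      cases hx : pvReadB stA.1 r c true
      · rfl
      · exact absurd ((hcont (r, c)).mpr ⟨hr.1, hr.2, hc.1, hc.2, hx⟩) h2
  by_cases hg : pvCellI grid r c = rc ∧ pvReadB stA.1 r c true = false
  · rw [if_pos hg, if_pos (hguard.mp hg)]
    have hokseed : pvOkc grid rc rows cols (r, c) := ⟨hr.1, hr.2, hc.1, hc.2, hg.1⟩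
    have hnm : ¬ pvMk rows cols stA.1 (r, c) := by
      rintro ⟨_, _, _, _, hx⟩
      rw [hg.2] at hx
      exact Bool.false_ne_true hx
    have hdis : ∀ p, pvReach grid rc rows cols (r, c) p → ¬ pvMk rows cols stA.1 p := by
      intro p hp hmk
      exact hnm (pvMk_closed_rtg grid rc rows cols stA.1 hcl p (r, c) hmk
        (pvReach_symm grid rc rows cols (r, c) p hp))
    obtain ⟨hd1, hm1, hmin1, hmax1, hmin2, hmax2⟩ :=
      pvFloodA_spec grid rc rows cols (r, c) stA.1 hdims hokseed hdis
    have hgrow := pvGrow_reach grid rc rows cols (r, c) hokseed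
    refine ⟨hd1, ?_, ?_, ?_, ?_, ?_⟩
    · intro p
      rw [PySem.Set.contains_iff, PySem.Set.mem_union]
      constructor
      · rintro (hp | hp)
        · exact (hm1 p).mpr (.inl ((hcont p).mp ((PySem.Set.contains_iff _ _).mpr hp)))
        · exact (hm1 p).mpr (.inr ((hgrow p).mp hp))
      · intro hp
        rcases (hm1 p).mp hp with h' | h'
        · exact .inl ((PySem.Set.contains_iff _ _).mp ((hcont p).mpr h'))
        · exact .inr ((hgrow p).mpr h')
    · intro p hp
      rcases (hm1 p).mp hp with h' | h'
      · exact hok p h'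
      · exact pvReach_ok grid rc rows cols (r, c) p hokseed h'
    · intro p q hp hadj
      rcases (hm1 p).mp hp with h' | h'
      · exact (hm1 q).mpr (.inl (hcl p q h' hadj))
      · exact (hm1 q).mpr (.inr (h'.tail hadj))
    · show stA.2 ++ [_] = stB.2 ++ [_]
      rw [hrects]
      congr 2
      have e1 := pvMinEq _ r (pvReach grid rc rows cols (r, c)) Prod.fst
        (pvGrow grid rc rows cols (PySem.Set.add PySem.Set.empty (r, c)))
        hgrow (r, c) .refl rfl hmin1
      have e2 := pvMinEq _ c (pvReach grid rc rows cols (r, c)) Prod.snd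
        (pvGrow grid rc rows cols (PySem.Set.add PySem.Set.empty (r, c)))
        hgrow (r, c) .refl rfl hmin2
      have e3 := pvMaxEq _ r (pvReach grid rc rows cols (r, c)) Prod.fst
        (pvGrow grid rc rows cols (PySem.Set.add PySem.Set.empty (r, c)))
        hgrow (r, c) .refl rfl hmax1
      have e4 := pvMaxEq _ c (pvReach grid rc rows cols (r, c)) Prod.snd
        (pvGrow grid rc rows cols (PySem.Set.add PySem.Set.empty (r, c)))
        hgrow (r, c) .refl rfl hmax2
      rw [e1, e2, e3, e4]
    · intro q hq
      rcases List.mem_append.mp hq with hq | hq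
      · exact hbnd q hq
      · rw [List.mem_singleton] at hq
        subst hq
        obtain ⟨p1, hp1, he1⟩ := pvIsMin_attain _ r Prod.fst _ (r, c) .refl rfl hmin1
        obtain ⟨p2, hp2, he2⟩ := pvIsMax_attain _ r Prod.fst _ (r, c) .refl rfl hmax1
        obtain ⟨p3, hp3, he3⟩ := pvIsMin_attain _ c Prod.snd _ (r, c) .refl rfl hmin2
        obtain ⟨p4, hp4, he4⟩ := pvIsMax_attain _ c Prod.snd _ (r, c) .refl rfl hmax2
        obtain ⟨o11, o12, o13, o14, _⟩ := pvReach_ok grid rc rows cols (r, c) p1 hokseed hp1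
        obtain ⟨o21, o22, o23, o24, _⟩ := pvReach_ok grid rc rows cols (r, c) p2 hokseed hp2
        obtain ⟨o31, o32, o33, o34, _⟩ := pvReach_ok grid rc rows cols (r, c) p3 hokseed hp3
        obtain ⟨o41, o42, o43, o44, _⟩ := pvReach_ok grid rc rows cols (r, c) p4 hokseed hp4
        have hle1 := hmin1.2.1 p2 hp2
        have hle2 := hmin2.2.1 p4 hp4
        dsimp only at he1 he2 he3 he4 hle1 hle2
        unfold pvRectIn
        dsimp only
        refine ⟨?_, ?_, ?_, ?_, ?_, ?_, ?_, ?_, ?_, ?_⟩ <;> omega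
  · rw [if_neg hg, if_neg (fun hh => hg (hguard.mpr hh))]
    exact ⟨hdims, hcont, hok, hcl, hrects, hbnd⟩

theorem pvScan_eq (grid : List (List Int)) (rc rows cols : Int) :
    pvRelScan grid rc rows cols (pvScanA grid rc rows cols) (pvScanB grid rc rows cols) := by
  unfold pvScanA pvScanB
  apply pvFoldlRel (pvRelScan grid rc rows cols)
  · intro a b r0 hr0 hab
    apply pvFoldlRel (pvRelScan grid rc rows cols)
    · intro a b c0 hc0 hab
      exact pvScanStep grid rc rows cols r0 c0 (PySem.List.mem_pyRange_one.mp hr0)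
        (PySem.List.mem_pyRange_one.mp hc0) a b hab
    · exact hab
  · refine ⟨⟨by simp, by intro row hrow; simp_all⟩, ?_, ?_, ?_, rfl, ?_⟩
    · intro p
      constructor
      · intro h
        simp [PySem.Set.empty] at h
      · intro h
        exact absurd h (pvMk_init rows cols p)
    · intro p h
      exact absurd h (pvMk_init rows cols p)
    · intro p q h _
      exact absurd h (pvMk_init rows cols p)
    · intro q hq
      cases hq

-- ===== masks: A's boolean matrices vs B's coordinate sets =====

def pvRelM (rows cols : Int) (m : List (List Bool)) (s : PySem.Set (Int × Int)) : Prop :=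
  m.length = rows.toNat ∧ (∀ row ∈ m, row.length = cols.toNat) ∧
  ∀ r c : Int, 0 ≤ r → 0 ≤ c → (pvReadB m r c false = true ↔ s.contains (r, c) = true)

theorem pvRelM_mark (rows cols : Int) (m : List (List Bool)) (s : PySem.Set (Int × Int))
    (hrel : pvRelM rows cols m s) (r c : Int)
    (hrc : 0 ≤ r ∧ r < rows ∧ 0 ≤ c ∧ c < cols) :
    pvRelM rows cols (pvWriteB m r c) (PySem.Set.add s (r, c)) := by
  obtain ⟨hlen, hrows, hmem⟩ := hrel
  have hr : r.toNat < m.length := by omega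
  have hc : c.toNat < m[r.toNat].length := by
    rw [hrows _ (List.getElem_mem hr)]; omega
  refine ⟨by rw [pvWriteB_length]; exact hlen, pvWriteB_rows _ _ _ _ hrows, ?_⟩
  intro r' c' h0' h1'
  rw [pvContains_add]
  by_cases hq : r' = r ∧ c' = c
  · obtain ⟨hq1, hq2⟩ := hq
    subst hq1; subst hq2
    rw [pvReadB_write_self m r' c' false hrc.1 hrc.2.2.1 hr hc]
    simp
  · rw [pvReadB_write_ne m r c r' c' false hrc.1 hrc.2.2.1 h0' h1' hq]
    have hne : ((r', c') == (r, c)) = false := by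
      simp only [beq_eq_false_iff_ne, ne_eq, Prod.mk.injEq]
      exact hq
    rw [hne, Bool.or_false]
    exact hmem r' c' h0' h1'

theorem pvRelM_init (rows cols : Int) :
    pvRelM rows cols (List.replicate rows.toNat (List.replicate cols.toNat false))
      PySem.Set.empty := by
  refine ⟨by simp, by intro row hrow; simp_all, ?_⟩
  intro r c h0 h1
  constructor
  · intro h5
    exfalso
    by_cases hr : r.toNat < rows.toNat
    · by_cases hc : c.toNat < cols.toNat
      · rw [pvReadB_eq_getElem _ _ _ _ h0 h1 (by simp; omega)
          (by simp [List.getElem_replicate]; omega)] at h5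
        simp [List.getElem_replicate] at h5
      · rw [pvReadB_q _ _ _ _ h0 h1] at h5
        rw [List.getElem?_eq_getElem (show r.toNat <
          (List.replicate rows.toNat (List.replicate cols.toNat false)).length by
            simp only [List.length_replicate]; omega)] at h5
        simp only [Option.getD_some, List.getElem_replicate] at h5
        rw [show (List.replicate cols.toNat false)[c.toNat]? = none from
          List.getElem?_eq_none (by simp only [List.length_replicate]; omega)] at h5
        simp at h5
    · rw [pvReadB_q _ _ _ _ h0 h1] at h5
      rw [show (List.replicate rows.toNat (List.replicate cols.toNat false))[r.toNat]? = none from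
        List.getElem?_eq_none (by simp only [List.length_replicate]; omega)] at h5
      simp at h5
  · intro h
    cases h

theorem pvMasks_bisim (rows cols : Int) (rects : List (Int × Int × Int × Int))
    (hbnd : ∀ q ∈ rects, pvRectIn rows cols q) :
    pvRelM rows cols (pvMasksA rows cols rects).1 (pvCellsB rows cols rects).1 ∧
      pvRelM rows cols (pvMasksA rows cols rects).2 (pvCellsB rows cols rects).2 := by
  unfold pvMasksA pvCellsB
  refine pvFoldlRel (fun (ms : List (List Bool) × List (List Bool))
      (cs : PySem.Set (Int × Int) × PySem.Set (Int × Int)) =>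
      pvRelM rows cols ms.1 cs.1 ∧ pvRelM rows cols ms.2 cs.2)
    _ _ rects ?_ _ _ ?_
  · intro ms cs q hq h
    obtain ⟨hrm, hbm⟩ := h
    obtain ⟨b1, b2, b3, b4, b5, b6, b7, b8, b9, b10⟩ := hbnd q hq
    refine ⟨?_, ?_⟩
    · apply pvFoldlRel (pvRelM rows cols)
      · intro m s r hrmem hrel
        apply pvFoldlRel (pvRelM rows cols)
        · intro m s c hcmem hrel
          have hrr := PySem.List.mem_pyRange_one.mp hrmem
          have hcc := PySem.List.mem_pyRange_one.mp hcmem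
          exact pvRelM_mark rows cols m s hrel r c ⟨by omega, by omega, by omega, by omega⟩
        · exact hrel
      · exact hrm
    · apply pvFoldlRel (pvRelM rows cols)
      · intro m s r hrmem hrel
        apply pvFoldlRel (pvRelM rows cols)
        · intro m s c hcmem hrel
          have hrr := PySem.List.mem_pyRange_one.mp hrmem
          have hcc := PySem.List.mem_pyRange_one.mp hcmem
          split
          · exact pvRelM_mark rows cols m s hrel r c
              ⟨by omega, by omega, by omega, by omega⟩
          · exact hrel
        · exact hrel
      · exact hbm
  · exact ⟨pvRelM_init rows cols, pvRelM_init rows cols⟩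

-- ===== the per-row output phase =====

theorem pvRowFold (P : Int → Prop) [DecidablePred P] (v : Int → Int) :
    ∀ (n : Nat) (row : List Int), n ≤ row.length →
    (PySem.List.pyRange 0 (n : Int)).foldl
        (fun row c => if P c then row.set c.toNat (v c) else row) row =
      (List.range n).map (fun (j : Nat) => if P (j : Int) then v (j : Int) else row.getD j 0) ++
        row.drop n := by
  intro n
  induction n with
  | zero => intro row _; simp
  | succ n ih =>
    intro row hn
    have hcast : ((n + 1 : Nat) : Int) = (n : Int) + 1 := by push_cast; ring
    rw [hcast, PySem.List.pyRange_one_succ_right (by positivity), List.foldl_append,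
      ih row (by omega), List.foldl_cons, List.foldl_nil]
    have hdrop : row.drop n = row[n] :: row.drop (n + 1) :=
      (List.getElem_cons_drop (by omega)).symm
    have hlenmap : ((List.range n).map
        (fun (j : Nat) => if P (j : Int) then v (j : Int) else row.getD j 0)).length = n := by simp
    rw [List.range_succ, List.map_append, List.map_singleton, List.append_assoc,
      List.singleton_append]
    by_cases hP : P (n : Int)
    · rw [if_pos hP, hdrop]
      rw [show ((n : Int)).toNat = n from by omega]
      rw [List.set_append]
      rw [if_neg (by omega)]
      rw [show n - ((List.range n).map
        (fun (j : Nat) => if P (j : Int) then v (j : Int) else row.getD j 0)).length = 0 from by omega]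
      simp only [hP, if_true]
      rfl
    · rw [if_neg hP, hdrop]
      simp only [hP, if_false]
      rw [List.getD_eq_getElem row 0 (show n < row.length from by omega)]
      rfl

theorem pvInnerWrites (P : Int → Prop) [DecidablePred P] (v : Int → Int) :
    ∀ (cs : List Int) (o : List (List Int)) (r : Int), 0 ≤ r → r.toNat < o.length →
      (∀ c ∈ cs, 0 ≤ c) →
    cs.foldl (fun o c => if P c then pvWriteI o r c (v c) else o) o =
      o.set r.toNat (cs.foldl (fun row c => if P c then row.set c.toNat (v c) else row)
        (o.getD r.toNat [])) := by
  intro cs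
  induction cs with
  | nil =>
    intro o r h0 hr _
    simp only [List.foldl_nil]
    rw [List.getD_eq_getElem o [] hr, List.set_getElem_self]
  | cons c cs ih =>
    intro o r h0 hr hcs
    simp only [List.foldl_cons]
    by_cases hP : P c
    · rw [if_pos hP, if_pos hP]
      rw [show pvWriteI o r c (v c) = o.set r.toNat ((o.getD r.toNat []).set c.toNat (v c)) from by
        unfold pvWriteI; rw [if_pos ⟨h0, hcs c List.mem_cons_self⟩]]
      rw [ih _ r h0 (by simpa using hr) (fun c hc => hcs c (List.mem_cons_of_mem _ hc))]
      rw [List.set_set]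
      congr 1
      rw [List.getD_eq_getElem _ [] (by simpa using hr), List.getElem_set_self (by simpa using hr)]
    · rw [if_neg hP, if_neg hP]
      exact ih o r h0 hr (fun c hc => hcs c (List.mem_cons_of_mem _ hc))

theorem pvOuterFold' (h : List (List Int) → Int → List (List Int)) (g : Int → List Int → List Int)
    (hstep : ∀ o r, 0 ≤ r → r.toNat < o.length →
      h o r = o.set r.toNat (g r (o.getD r.toNat []))) :
    ∀ (n : Nat) (o : List (List Int)), n ≤ o.length →
    (PySem.List.pyRange 0 (n : Int)).foldl h o =
      (List.range n).map (fun (i : Nat) => g (i : Int) (o.getD i [])) ++ o.drop n := by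
  intro n
  induction n with
  | zero => intro o _; simp
  | succ n ih =>
    intro o hn
    have hcast : ((n + 1 : Nat) : Int) = (n : Int) + 1 := by push_cast; ring
    rw [hcast, PySem.List.pyRange_one_succ_right (by positivity), List.foldl_append,
      ih o (by omega), List.foldl_cons, List.foldl_nil]
    have hdrop : o.drop n = o[n] :: o.drop (n + 1) :=
      (List.getElem_cons_drop (by omega)).symm
    have hlenmap : ((List.range n).map (fun (i : Nat) => g (i : Int) (o.getD i []))).length = n := by
      simp
    have hlen2 : ((List.range n).map (fun (i : Nat) => g (i : Int) (o.getD i [])) ++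
        o.drop n).length = o.length := by
      simp only [List.length_append, hlenmap, List.length_drop]; omega
    rw [hstep _ _ (by positivity) (by rw [hlen2]; omega)]
    have hgetD : ((List.range n).map (fun (i : Nat) => g (i : Int) (o.getD i [])) ++
        o.drop n).getD ((n : Int)).toNat [] = o.getD n [] := by
      rw [show ((n : Int)).toNat = n from by omega]
      rw [hdrop, List.getD_eq_getElem?_getD, List.getElem?_append_right (by omega)]
      rw [show n - ((List.range n).map (fun (i : Nat) => g (i : Int) (o.getD i []))).length = 0
        from by omega]
      simp
    rw [hgetD]
    rw [show ((n : Int)).toNat = n from by omega, hdrop]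
    rw [List.set_append, if_neg (by omega)]
    rw [show n - ((List.range n).map (fun (i : Nat) => g (i : Int) (o.getD i []))).length = 0
      from by omega]
    rw [List.range_succ, List.map_append, List.map_singleton, List.append_assoc]
    simp only [List.singleton_append]
    rfl

theorem pvMinD_eq (Ls : List Int) (d : Int) (hle : ∀ x ∈ Ls, x ≤ d) :
    PySem.List.minD Ls (fun x => x) d = Ls.foldl min d := by
  cases Ls with
  | nil => rfl
  | cons x t =>
    unfold PySem.List.minD PySem.List.min?
    simp only [List.foldl_cons]
    rw [show min d x = x from by have := hle x List.mem_cons_self; omega]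
    clear hle
    induction t generalizing x with
    | nil => rfl
    | cons y t ih =>
      simp only [List.foldl_cons]
      show (List.foldl _ (if y < x then some y else some x) t).getD d = List.foldl min (min x y) t
      split_ifs with h
      · rw [show min x y = y from by omega]
        exact ih y
      · rw [show min x y = x from by omega]
        exact ih x

theorem pvShadowL_lt (rows cols : Int) (q : Int × Int × Int × Int) (hq : pvRectIn rows cols q) :
    pvShadowL q < cols ∧ pvShadowL q ≤ cols := by
  obtain ⟨b1, b2, b3, b4, b5, b6, b7, b8, b9, b10⟩ := hq
  have hBpos : 0 < max (q.2.2.1 - q.1 + 1) (q.2.2.2 - q.2.1 + 1) := by omega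
  have hB : 0 ≤ PySem.Int.floordiv (max (q.2.2.1 - q.1 + 1) (q.2.2.2 - q.2.1 + 1)) 2 := by
    rw [PySem.Int.floordiv_eq_ediv_of_pos (by omega)]
    exact Int.ediv_nonneg (by omega) (by omega)
  unfold pvShadowL
  constructor <;> omega

theorem pvRangeGetD (l : List (List Int)) :
    (List.range l.length).map (fun i => l.getD i []) = l := by
  apply List.ext_getElem (by simp)
  intro i h1 h2
  simp [List.getElem?_eq_getElem h2]

theorem pvFlat_eq (grid : List (List Int))
    (hrect : ∀ row ∈ grid, row.length = (PySem.List.pyGetD grid 0 []).length) :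
    (PySem.List.pyRange 0 (grid.length : Int)).flatMap (fun r =>
      (PySem.List.pyRange 0 ((PySem.List.pyGetD grid 0 []).length : Int)).map
        (fun c => pvCellI grid r c)) = grid.flatten := by
  rw [List.flatMap_def]
  rw [List.map_congr_left (l := PySem.List.pyRange 0 (grid.length : Int))
    (f := fun r => (PySem.List.pyRange 0 ((PySem.List.pyGetD grid 0 []).length : Int)).map
      (fun c => pvCellI grid r c))
    (g := fun r => PySem.List.pyGetD grid r [])]
  · rw [PySem.List.pyRange_zero_natCast, List.map_map]
    rw [show ((fun r => PySem.List.pyGetD grid r []) ∘ fun k : Nat => (k : Int)) =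
        (fun i : Nat => grid.getD i []) from by funext i; exact PySem.List.pyGetD_natCast grid i []]
    rw [pvRangeGetD]
  · intro r hrmem
    have hr := PySem.List.mem_pyRange_one.mp hrmem
    have hrn : r.toNat < grid.length := by omega
    have hrow : PySem.List.pyGetD grid r [] = grid[r.toNat] := by
      rw [PySem.List.pyGetD_of_nonneg grid [] hr.1, List.getD_eq_getElem grid [] hrn]
    have hcell : ∀ c : Int, pvCellI grid r c = PySem.List.pyGetD grid[r.toNat] c 0 := by
      intro c
      unfold pvCellI
      rw [hrow]
    simp only [hcell]
    have hlen : ((PySem.List.pyGetD grid 0 []).length : Int) = PySem.List.len grid[r.toNat] := by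
      have := hrect grid[r.toNat] (List.getElem_mem hrn)
      simp [PySem.List.len, this]
    rw [hlen, PySem.List.map_pyGetD_pyRange_zero, hrow]

theorem pvContains_ofList {α : Type} [BEq α] [LawfulBEq α] (l : List α) (v : α) :
    (PySem.Set.ofList l).contains v = l.contains v := by
  by_cases h : v ∈ l <;> simp [PySem.Set.mem_ofList, h]

theorem pvTallyStep (m : List Int) (v : Int) :
    (if (PySem.Dict.counter m).contains v then
        (PySem.Set.ofList m, (PySem.Dict.counter m).insert v ((PySem.Dict.counter m).getD v 0 + 1))
      else (PySem.Set.ofList m ++ [v], (PySem.Dict.counter m).insert v 1)) =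
      (PySem.Set.ofList (m ++ [v]), PySem.Dict.counter (m ++ [v])) := by
  have hofl : PySem.Set.ofList (m ++ [v]) = PySem.Set.add (PySem.Set.ofList m) v := by
    unfold PySem.Set.ofList
    rw [List.foldl_append, List.foldl_cons, List.foldl_nil]
  have hctr : PySem.Dict.counter (m ++ [v]) =
      (PySem.Dict.counter m).insert v ((PySem.Dict.counter m).getD v 0 + 1) :=
    PySem.Dict.counter_append_singleton m v
  rw [hofl, hctr]
  unfold PySem.Set.add
  rw [pvContains_ofList, ← PySem.Dict.contains_counter]
  by_cases h : (PySem.Dict.counter m).contains v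
  · rw [if_pos h, if_pos h]
  · rw [if_neg h, if_neg h]
    have hc0 : (PySem.Dict.counter m).getD v 0 = 0 := by
      rw [PySem.Dict.getD_counter]
      rw [PySem.Dict.contains_counter] at h
      have : v ∉ m := by
        intro hm
        rw [← List.contains_iff_mem] at hm
        exact h hm
      simp [List.count_eq_zero.mpr this]
    rw [hc0]
    norm_num

theorem pvTally_eq (flat : List Int) :
    flat.foldl (fun (s : List Int × PySem.Dict Int Int) v =>
        if s.2.contains v then (s.1, s.2.insert v (s.2.getD v 0 + 1))
        else (s.1 ++ [v], s.2.insert v 1)) ([], PySem.Dict.empty) =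
      (PySem.Set.ofList flat, PySem.Dict.counter flat) := by
  have haux : ∀ (l m : List Int),
      l.foldl (fun (s : List Int × PySem.Dict Int Int) v =>
        if s.2.contains v then (s.1, s.2.insert v (s.2.getD v 0 + 1))
        else (s.1 ++ [v], s.2.insert v 1)) (PySem.Set.ofList m, PySem.Dict.counter m) =
      (PySem.Set.ofList (m ++ l), PySem.Dict.counter (m ++ l)) := by
    intro l
    induction l with
    | nil => intro m; simp
    | cons v t ih =>
      intro m
      rw [List.foldl_cons]
      rw [show ((if (PySem.Dict.counter m).contains v then
          (PySem.Set.ofList m, (PySem.Dict.counter m).insert v ((PySem.Dict.counter m).getD v 0 + 1))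
        else (PySem.Set.ofList m ++ [v], (PySem.Dict.counter m).insert v 1)) :
          List Int × PySem.Dict Int Int) =
        (PySem.Set.ofList (m ++ [v]), PySem.Dict.counter (m ++ [v])) from pvTallyStep m v]
      rw [ih (m ++ [v])]
      simp
  have h0 := haux flat []
  simpa using h0

theorem pvBg_map (l : List Int) (g : Int → Int) (hl : l ≠ []) :
    (PySem.List.maxD (l.map (fun k => (k, g k))) (fun kv => kv.2) ((0 : Int), (0 : Int))).1 =
      PySem.List.maxD l g 0 := by
  cases l with
  | nil => exact absurd rfl hl
  | cons x t =>
    unfold PySem.List.maxD PySem.List.max?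
    simp only [List.map_cons, List.foldl_cons]
    induction t generalizing x with
    | nil => rfl
    | cons y t ih =>
      simp only [List.map_cons, List.foldl_cons]
      show ((List.foldl _ (if g x < g y then some (y, g y) else some (x, g x)) (t.map _)).getD
        ((0 : Int), (0 : Int))).1 = (List.foldl _ (if g x < g y then some y else some x) t).getD 0
      split_ifs with h
      · exact ih y (List.cons_ne_nil _ _)
      · exact ih x (List.cons_ne_nil _ _)

theorem pvBg_eq (flat : List Int) (hne : flat ≠ []) :
    (PySem.List.maxD (PySem.Dict.counter flat).items (fun kv => kv.2) ((0 : Int), (0 : Int))).1 =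
      PySem.List.maxD (PySem.Set.ofList flat) (fun v => (PySem.Dict.counter flat).getD v 0) 0 := by
  rw [PySem.Dict.items_counter]
  rw [show (fun v : Int => (PySem.Dict.counter flat).getD v 0) =
    (fun v : Int => ((List.count v flat : Int))) from by
      funext v; exact PySem.Dict.getD_counter flat v]
  apply pvBg_map (PySem.Set.ofList flat) (fun k => ((List.count k flat : Int)))
  obtain ⟨x, hx⟩ := List.exists_mem_of_ne_nil flat hne
  exact List.ne_nil_of_mem ((PySem.Set.mem_ofList flat x).mpr hx)

def pvBodyA (rects : List (Int × Int × Int × Int)) (r : Int) : List (Int × Int × Int × Int) :=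
  rects.filter (fun q => decide (q.1 ≤ r ∧ r ≤ q.2.2.1))

def pvLA (rects : List (Int × Int × Int × Int)) (cols r : Int) : Int :=
  (pvBodyA rects r).foldl (fun L q => min L (pvShadowL q)) cols

def pvPAb (rm bm : List (List Bool)) (rects : List (Int × Int × Int × Int)) (cols r c : Int) :
    Bool :=
  !(pvReadB rm r c false) &&
    ((pvReadB bm r c false) ||
      (decide (pvBodyA rects r ≠ []) && decide (pvLA rects cols r ≤ c)))

def pvVA (bm : List (List Bool)) (r c : Int) : Int :=
  if pvReadB bm r c false = true then 2 else 5

theorem pvStepA_eq (rm bm : List (List Bool)) (rects : List (Int × Int × Int × Int))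
    (cols r : Int) (out : List (List Int)) (c : Int) :
    (if pvReadB rm r c false = true then out
      else if pvReadB bm r c false = true then pvWriteI out r c 2
      else if pvBodyA rects r ≠ [] ∧ pvLA rects cols r ≤ c then pvWriteI out r c 5
      else out) =
    (if pvPAb rm bm rects cols r c = true then pvWriteI out r c (pvVA bm r c) else out) := by
  unfold pvPAb pvVA
  by_cases h1 : pvReadB rm r c false = true <;>
    by_cases h2 : pvReadB bm r c false = true <;>
    by_cases h3 : pvBodyA rects r ≠ [] ∧ pvLA rects cols r ≤ c <;>
    simp [h1, h2, h3]

theorem pvIffBool (a b : Bool) (h : a = true ↔ b = true) : a = b := by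
  cases a <;> cases b <;> simp_all

theorem pvRowPhase_eq (grid : List (List Int)) (colsN : Nat)
    (rects : List (Int × Int × Int × Int)) (rm bm : List (List Bool))
    (rcs bcs : PySem.Set (Int × Int))
    (hrect : ∀ row ∈ grid, row.length = colsN)
    (hrm : pvRelM (grid.length : Int) (colsN : Int) rm rcs)
    (hbm : pvRelM (grid.length : Int) (colsN : Int) bm bcs)
    (hbnd : ∀ q ∈ rects, pvRectIn (grid.length : Int) (colsN : Int) q) :
    pvRowPhaseA (grid.length : Int) (colsN : Int) rects rm bm grid =
      pvRowPhaseB grid (grid.length : Int) (colsN : Int) rects rcs bcs := by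
  unfold pvRowPhaseA pvRowPhaseB
  have hstep : ∀ (o : List (List Int)) (r : Int), 0 ≤ r → r.toNat < o.length →
      (PySem.List.pyRange 0 (colsN : Int)).foldl (fun out c =>
        if pvReadB rm r c false = true then out
        else if pvReadB bm r c false = true then pvWriteI out r c 2
        else if (rects.filter (fun q => decide (q.1 ≤ r ∧ r ≤ q.2.2.1))) ≠ [] ∧
            (rects.filter (fun q => decide (q.1 ≤ r ∧ r ≤ q.2.2.1))).foldl
              (fun L q => min L (pvShadowL q)) (colsN : Int) ≤ c then pvWriteI out r c 5
        else out) o =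
      o.set r.toNat ((PySem.List.pyRange 0 (colsN : Int)).foldl (fun row c =>
        if pvPAb rm bm rects (colsN : Int) r c = true then row.set c.toNat (pvVA bm r c) else row)
        (o.getD r.toNat [])) := by
    intro o r h0 hr
    rw [PySem.List.foldl_congr_mem (PySem.List.pyRange 0 (colsN : Int))
      (fun out c =>
        if pvReadB rm r c false = true then out
        else if pvReadB bm r c false = true then pvWriteI out r c 2
        else if (rects.filter (fun q => decide (q.1 ≤ r ∧ r ≤ q.2.2.1))) ≠ [] ∧
            (rects.filter (fun q => decide (q.1 ≤ r ∧ r ≤ q.2.2.1))).foldl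
              (fun L q => min L (pvShadowL q)) (colsN : Int) ≤ c then pvWriteI out r c 5
        else out)
      (fun out c =>
        if pvPAb rm bm rects (colsN : Int) r c = true then pvWriteI out r c (pvVA bm r c) else out) o
      (fun acc c _ => pvStepA_eq rm bm rects (colsN : Int) r acc c)]
    exact pvInnerWrites _ _ _ o r h0 hr
      (fun c hc => (PySem.List.mem_pyRange_one.mp hc).1)
  rw [pvOuterFold' _ (fun r row => (PySem.List.pyRange 0 (colsN : Int)).foldl (fun row c =>
    if pvPAb rm bm rects (colsN : Int) r c = true then row.set c.toNat (pvVA bm r c) else row) row)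
    hstep grid.length grid (le_refl _)]
  rw [List.drop_length, List.append_nil]
  simp only [PySem.List.foldl_append_singleton_eq_map, List.nil_append]
  rw [PySem.List.pyRange_zero_natCast (n := grid.length), List.map_map]
  apply List.map_congr_left
  intro i hi
  rw [List.mem_range] at hi
  simp only [Function.comp]
  have hrowlen : (grid.getD i []).length = colsN := by
    rw [List.getD_eq_getElem grid [] hi]
    exact hrect _ (List.getElem_mem hi)
  rw [pvRowFold (fun c => pvPAb rm bm rects (colsN : Int) (i : Int) c = true)
    (pvVA bm (i : Int)) colsN (grid.getD i []) (by omega)]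
  rw [show (grid.getD i []).drop colsN = [] from by
    rw [List.drop_eq_nil_iff]; omega]
  rw [List.append_nil]
  rw [PySem.List.pyRange_zero_natCast (n := colsN), List.map_map]
  apply List.map_congr_left
  intro j hj
  rw [List.mem_range] at hj
  simp only [Function.comp]
  have h0i : (0 : Int) ≤ (i : Int) := by positivity
  have h0j : (0 : Int) ≤ (j : Int) := by positivity
  have hbeRM : pvReadB rm (i : Int) (j : Int) false = rcs.contains ((i : Int), (j : Int)) :=
    pvIffBool _ _ (hrm.2.2 (i : Int) (j : Int) h0i h0j)
  have hbeBM : pvReadB bm (i : Int) (j : Int) false = bcs.contains ((i : Int), (j : Int)) :=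
    pvIffBool _ _ (hbm.2.2 (i : Int) (j : Int) h0i h0j)
  have hgv : (grid.getD i []).getD j 0 = pvCellI grid (i : Int) (j : Int) := by
    unfold pvCellI
    rw [PySem.List.pyGetD_natCast, PySem.List.pyGetD_natCast]
  have hLs : ((pvBodyA rects (i : Int)).map pvShadowL ≠ []) ↔ pvBodyA rects (i : Int) ≠ [] := by
    simp
  have hLeq : PySem.List.minD ((pvBodyA rects (i : Int)).map pvShadowL) (fun x => x)
      (colsN : Int) = pvLA rects (colsN : Int) (i : Int) := by
    rw [pvMinD_eq _ _ ?hle]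
    · unfold pvLA
      rw [List.foldl_map]
    · intro x hx
      rw [List.mem_map] at hx
      obtain ⟨q, hq, rfl⟩ := hx
      have hq' : q ∈ rects := List.mem_of_mem_filter hq
      exact (pvShadowL_lt _ _ q (hbnd q hq')).2
  unfold pvPAb pvVA
  simp only [hbeRM, hbeBM, hgv]
  rw [show (rects.filter (fun q => decide (q.1 ≤ (i : Int) ∧ (i : Int) ≤ q.2.2.1)))
    = pvBodyA rects (i : Int) from rfl]
  rw [hLeq]
  by_cases h1 : ((i : Int), (j : Int)) ∈ rcs <;>
    by_cases h2 : ((i : Int), (j : Int)) ∈ bcs <;>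
    by_cases h3 : pvBodyA rects (i : Int) ≠ [] ∧ pvLA rects (colsN : Int) (i : Int) ≤ (j : Int) <;>
    simp [h1, h2, h3, hLs]

theorem pvSlice_id (grid : List (List Int)) :
    grid.map (fun row => PySem.List.slice row none none) = grid := by
  simp [PySem.List.slice_none_none]

theorem transform_eq_alt (grid : List (List Int)) (hpre : Pre_transform grid) :
    transform grid = transform_alt grid := by
  obtain ⟨hne, h0ne, hrect⟩ := hpre
  have hg0 : PySem.List.pyGetD grid 0 [] = grid.headD [] := by
    cases grid with
    | nil => exact absurd rfl hne
    | cons g0 gt => simp [PySem.List.pyGetD, PySem.List.pyGet?, PySem.List.pyIdx?]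
  have hrect' : ∀ row ∈ grid, row.length = (PySem.List.pyGetD grid 0 []).length := by
    intro row hrow
    rw [hg0]
    exact hrect row hrow
  have hflatne : grid.flatten ≠ [] := by
    cases grid with
    | nil => exact absurd rfl hne
    | cons g0 gt =>
      simp only [List.flatten_cons]
      intro h
      rcases List.append_eq_nil_iff.mp h with ⟨h1, _⟩
      exact h0ne h1
  simp only [transform, transform_alt]
  rw [pvFlat_eq grid hrect']
  rw [← List.foldl_flatten]
  rw [pvTally_eq grid.flatten]
  rw [← pvBg_eq grid.flatten hflatne]
  rw [PySem.Dict.keys_counter]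
  by_cases hF : (PySem.Set.ofList grid.flatten).filter (fun k =>
      k != (PySem.List.maxD (PySem.Dict.counter grid.flatten).items
        (fun kv => kv.2) ((0 : Int), (0 : Int))).1) = []
  · rw [if_pos hF, if_pos hF]
  · rw [if_neg hF, if_neg hF]
    rw [pvSlice_id]
    have hscan := pvScan_eq grid
      (((PySem.Set.ofList grid.flatten).filter (fun k =>
        k != (PySem.List.maxD (PySem.Dict.counter grid.flatten).items
          (fun kv => kv.2) ((0 : Int), (0 : Int))).1)).headD 0)
      (grid.length : Int) ((PySem.List.pyGetD grid 0 []).length : Int)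
    obtain ⟨_, _, _, _, hrectseq, hbnd0⟩ := hscan
    rw [← hrectseq]
    have hmask := pvMasks_bisim (grid.length : Int) ((PySem.List.pyGetD grid 0 []).length : Int)
      _ hbnd0
    exact pvRowPhase_eq grid (PySem.List.pyGetD grid 0 []).length _ _ _ _ _ hrect'
      hmask.1 hmask.2 hbnd0

-- ===== VERDICT (by name: the statement is the Claim_ definition above) =====
theorem transform_spec : Claim_equal_transform := by
  intro grid _ hpre
  unfold Spec_transform
  exact transform_eq_alt grid hpre
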